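-- pv_equiv track=rewrite | github.com/Aqusiz/ps_practice | samsung/2024_firsthalf_morning_A.py | get_tiles_be_removed
-- ===== SOURCE A (Python) =====
-- from collections import deque
--
-- drdc = ((1, 0), (-1, 0), (0, 1), (0, -1))
--
-- def get_tiles_be_removed(t):
--   visited = [[False for _ in range(5)] for _ in range(5)]
--
--   for r in range(5):
--     for c in range(5):
--       if visited[r][c]:
--         continue
--       routes = bfs(r, c, visited, t)
--       # 3칸 이상 같은 값들이 붙어 있는 블럭이 존재한다면, 구멍 뚫기
--       if len(routes) >= 3:
--         for row, column in routes:
--           t[row][column] = 0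
--
--   return t
--
-- def bfs(r, c, visited, t):
--   # bfs를 이용해 같은 값이 붙어 있는 블럭을 반환
--   dq = deque()
--
--   dq.append((r, c))
--   routes = [(r, c)]
--   visited[r][c] = True
--   while dq:
--     curr_r, curr_c = dq.popleft()
--     for dr, dc in drdc:
--       nr, nc = curr_r + dr, curr_c + dc
--       if nr < 0 or nc < 0 or nr >= 5 or nc >= 5 or visited[nr][nc] or t[nr][nc] != t[r][c]:
--         continue
--       routes.append((nr, nc))
--       visited[nr][nc] = True
--       dq.append((nr, nc))
--
--   return routes
-- ===== SOURCE B (Python) =====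
-- def get_tiles_be_removed(t):
--   # Union-find over the 25 cells; groups of size >= 3 are zeroed.
--   parent = list(range(25))
--
--   def find(x):
--     while parent[x] != x:
--       x = parent[x]
--     return x
--
--   for r in range(5):
--     for c in range(5):
--       i = r * 5 + c
--       if c < 4 and t[r][c] == t[r][c + 1]:
--         ri, rj = find(i), find(i + 1)
--         if ri != rj:
--           parent[ri] = rj
--       if r < 4 and t[r][c] == t[r + 1][c]:
--         ri, rj = find(i), find(i + 5)
--         if ri != rj:
--           parent[ri] = rj
--
--   groups = {}
--   for i in range(25):
--     groups.setdefault(find(i), []).append(i)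
--
--   for group in groups.values():
--     if len(group) >= 3:
--       for i in group:
--         t[i // 5][i % 5] = 0
--
--   return t
-- ===== Notes on version B (the rewrite author's own statement) =====
-- stated objective: alternative
-- what changed: Replaces A's BFS flood-fill sweep (deque, shared visited grid, zeroing blocks as it scans the mutating grid) by a union-find over the 25 cells: union each cell with its equal-valued right/down neighbour on the original grid, group cells by root, then zero every group of size >= 3 in one pass.
import Mathlib
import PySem

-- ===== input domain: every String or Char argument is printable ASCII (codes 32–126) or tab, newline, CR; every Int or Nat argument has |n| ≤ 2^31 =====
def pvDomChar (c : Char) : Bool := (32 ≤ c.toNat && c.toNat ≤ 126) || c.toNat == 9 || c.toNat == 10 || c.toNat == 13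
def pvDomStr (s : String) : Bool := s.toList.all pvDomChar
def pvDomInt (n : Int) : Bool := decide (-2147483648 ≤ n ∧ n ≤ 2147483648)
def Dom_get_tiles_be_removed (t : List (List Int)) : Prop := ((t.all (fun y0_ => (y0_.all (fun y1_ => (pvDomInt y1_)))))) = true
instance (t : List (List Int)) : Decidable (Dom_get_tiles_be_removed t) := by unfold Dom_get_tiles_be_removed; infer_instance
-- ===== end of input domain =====

-- B replaces A's BFS flood-fill sweep by a union-find over the 25 cells (union on
-- equal-valued right/down neighbours, then zero every root group of size >= 3)
-- (objective: alternative; both Pythons mutate t in place, return value proved equal).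

-- Shared 2-d list primitives (both Pythons read/assign t[r][c] identically;
-- all uses are guarded by 0 ≤ r,c < 5, so .toNat / the defaults are never hit
-- on admitted inputs).
def get2 (g : List (List Int)) (r c : Int) : Int := ((g.getD r.toNat []).getD c.toNat 0)
def set2 (g : List (List Int)) (r c : Int) (x : Int) : List (List Int) :=
  g.set r.toNat ((g.getD r.toNat []).set c.toNat x)

-- ===== PORT A =====
-- visited grid primitives (visited is always a real 5×5 grid; the default
-- `true` for an out-of-shape read is unreachable)
def get2b (v : List (List Bool)) (r c : Int) : Bool := ((v.getD r.toNat []).getD c.toNat true)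
def set2b (v : List (List Bool)) (r c : Int) : List (List Bool) :=
  v.set r.toNat ((v.getD r.toNat []).set c.toNat true)

def drdc : List (Int × Int) := [(1,0),(-1,0),(0,1),(0,-1)]

-- number of unvisited cells, the termination measure of the BFS loop
def countFalse (v : List (List Bool)) : Nat := (v.map (fun row => row.count false)).sum

-- BFS state during the inner `for dr, dc in drdc` loop: (routes, visited, new queue entries)
def BfsS : Type := List (Int × Int) × List (List Bool) × List (Int × Int)

-- one direction of the inner loop of bfs (guard order as in the Python)
def bfsDir (t : List (List Int)) (r c cr cc : Int) (s : BfsS) (d : Int × Int) : BfsS :=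
  if cr + d.1 < 0 ∨ cc + d.2 < 0 ∨ 5 ≤ cr + d.1 ∨ 5 ≤ cc + d.2 ∨
      get2b s.2.1 (cr + d.1) (cc + d.2) = true ∨
      get2 t (cr + d.1) (cc + d.2) ≠ get2 t r c then s
  else (s.1 ++ [(cr + d.1, cc + d.2)], set2b s.2.1 (cr + d.1) (cc + d.2),
        s.2.2 ++ [(cr + d.1, cc + d.2)])

def bfsMeasure (s : BfsS) : Nat := 26 * countFalse s.2.1 + s.2.2.length

-- termination helpers for the port (cited by decreasing_by)
theorem count_false_set_true (row : List Bool) (j : Nat) (hj : j < row.length)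
    (hv : row[j] = false) : (row.set j true).count false + 1 = row.count false := by
  rw [List.set_eq_take_cons_drop _ hj]
  conv_rhs => rw [← List.take_append_drop j row, List.drop_eq_getElem_cons hj, hv]
  simp [List.count_append]
  omega

theorem countFalse_set2b (v : List (List Bool)) (r c : Int)
    (h : get2b v r c = false) : countFalse (set2b v r c) + 1 = countFalse v := by
  unfold get2b at h
  unfold set2b countFalse
  have hi : r.toNat < v.length := by
    by_contra hi
    have hnil : v.getD r.toNat [] = [] := by
      rw [List.getD_eq_getElem?_getD, List.getElem?_eq_none (by omega)]; rfl
    rw [hnil] at h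
    simp at h
  have hrow : v.getD r.toNat [] = v[r.toNat] := by
    rw [List.getD_eq_getElem?_getD, List.getElem?_eq_getElem hi]; rfl
  rw [hrow] at h
  have hj : c.toNat < (v[r.toNat]'hi).length := by
    by_contra hj
    have htr : (v[r.toNat]'hi).getD c.toNat true = true := by
      rw [List.getD_eq_getElem?_getD, List.getElem?_eq_none (by omega)]; rfl
    exact Bool.noConfusion (htr.symm.trans h)
  have hval : (v[r.toNat]'hi)[c.toNat] = false := by
    rw [List.getD_eq_getElem?_getD, List.getElem?_eq_getElem hj] at h
    exact h
  rw [hrow, List.set_eq_take_cons_drop _ hi]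
  conv_rhs => rw [← List.take_append_drop r.toNat v, List.drop_eq_getElem_cons hi]
  simp only [List.map_append, List.map_cons, List.sum_append, List.sum_cons]
  have := count_false_set_true (v[r.toNat]'hi) c.toNat hj hval
  omega

theorem bfsDir_measure (t : List (List Int)) (r c cr cc : Int) (s : BfsS) (d : Int × Int) :
    bfsMeasure (bfsDir t r c cr cc s d) ≤ bfsMeasure s := by
  unfold bfsDir
  split
  · exact le_refl _
  · rename_i hg
    have hfalse : get2b s.2.1 (cr + d.1) (cc + d.2) = false := by
      by_contra hb
      exact hg (Or.inr (Or.inr (Or.inr (Or.inr (Or.inl (by simpa using hb))))))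
    have := countFalse_set2b s.2.1 (cr + d.1) (cc + d.2) hfalse
    simp only [bfsMeasure, List.length_append, List.length_cons, List.length_nil]
    omega

theorem foldl_measure_le {α β : Type} (m : α → Nat) (f : α → β → α)
    (h : ∀ s d, m (f s d) ≤ m s) (l : List β) (s : α) : m (List.foldl f s l) ≤ m s := by
  induction l generalizing s with
  | nil => exact le_refl _
  | cons x xs ih => exact le_trans (ih (f s x)) (h s x)

def bfsLoop (t : List (List Int)) (r c : Int) (dq : List (Int × Int))
    (vis : List (List Bool)) (routes : List (Int × Int)) :
    List (Int × Int) × List (List Bool) :=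
  match dq with
  | [] => (routes, vis)
  | (cr, cc) :: dq' =>
      let st := drdc.foldl (bfsDir t r c cr cc) (routes, vis, [])
      bfsLoop t r c (dq' ++ st.2.2) st.2.1 st.1
termination_by 26 * countFalse vis + dq.length
decreasing_by
  have h := foldl_measure_le bfsMeasure (bfsDir t r c cr cc) (bfsDir_measure t r c cr cc)
      drdc (routes, vis, [])
  simp only [bfsMeasure, List.length_nil, List.length_append, List.length_cons] at h ⊢
  omega

def bfs (t : List (List Int)) (r c : Int) (vis : List (List Bool)) :
    List (Int × Int) × List (List Bool) :=
  bfsLoop t r c [(r, c)] (set2b vis r c) [(r, c)]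

def outerStep (s : List (List Int) × List (List Bool)) (p : Int × Int) :
    List (List Int) × List (List Bool) :=
  if get2b s.2 p.1 p.2 = true then s
  else
    let rv := bfs s.1 p.1 p.2 s.2
    let t' := if 3 ≤ rv.1.length then rv.1.foldl (fun g q => set2 g q.1 q.2 0) s.1 else s.1
    (t', rv.2)

def get_tiles_be_removed (t : List (List Int)) : List (List Int) :=
  let visited := List.replicate 5 (List.replicate 5 false)
  ((PySem.List.pyRange 0 5 1).foldl (fun s r =>
      (PySem.List.pyRange 0 5 1).foldl (fun s c => outerStep s (r, c)) s)
    (t, visited)).1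

-- ===== PORT B =====
-- parent[x]; x is always in range 0..24 on admitted runs, so the default is never hit
def pget (par : List Int) (x : Int) : Int := par.getD x.toNat 0

-- `while parent[x] != x: x = parent[x]`; fuel 25 (= number of nodes) bounds the parent chain
def findFuel : Nat → List Int → Int → Int
  | 0, _, x => x
  | fuel+1, par, x => if pget par x = x then x else findFuel fuel par (pget par x)

def findU (par : List Int) (x : Int) : Int := findFuel 25 par x

def unionU (par : List Int) (x y : Int) : List Int :=
  let ri := findU par x
  let rj := findU par y
  if ri ≠ rj then par.set ri.toNat rj else par

-- body of the double loop over r, c: the two conditional unions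
def unionCell (t : List (List Int)) (par : List Int) (r c : Int) : List Int :=
  let par1 := if c < 4 ∧ get2 t r c = get2 t r (c + 1)
              then unionU par (r * 5 + c) (r * 5 + c + 1) else par
  if r < 4 ∧ get2 t r c = get2 t (r + 1) c
  then unionU par1 (r * 5 + c) (r * 5 + c + 5) else par1

def get_tiles_be_removed_alt (t : List (List Int)) : List (List Int) :=
  let par := (PySem.List.pyRange 0 5 1).foldl (fun par r =>
      (PySem.List.pyRange 0 5 1).foldl (fun par c => unionCell t par r c) par)
    (PySem.List.pyRange 0 25 1)
  let groups := (PySem.List.pyRange 0 25 1).foldl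
      (fun d i => d.modify (findU par i) [] (· ++ [i]))
      (PySem.Dict.empty : PySem.Dict Int (List Int))
  groups.values.foldl (fun g grp =>
    if 3 ≤ grp.length then
      grp.foldl (fun g i => set2 g (PySem.Int.floordiv i 5) (PySem.Int.mod i 5) 0) g
    else g) t

-- ===== PRECONDITION & SPEC =====
-- Pre_ = exactly the inputs where Python A returns instead of raising IndexError:
-- a grid with at least 5 rows whose first 5 rows each have at least 5 entries.
def Pre_get_tiles_be_removed (t : List (List Int)) : Prop :=
  5 ≤ t.length ∧ ∀ row ∈ t.take 5, 5 ≤ row.length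
instance (t : List (List Int)) : Decidable (Pre_get_tiles_be_removed t) := by
  unfold Pre_get_tiles_be_removed; infer_instance

def pvWitness_get_tiles_be_removed : List (List Int) :=
  [[1, 1, 2, 3, 4], [1, 5, 6, 7, 8], [2, 2, 2, 9, 9], [3, 3, 9, 9, 8], [4, 4, 4, 4, 7]]

def Spec_get_tiles_be_removed (t : List (List Int)) (out : List (List Int)) : Prop := out = get_tiles_be_removed_alt t
instance (t : List (List Int)) (out : List (List Int)) : Decidable (Spec_get_tiles_be_removed t out) := by unfold Spec_get_tiles_be_removed; infer_instance

-- ===== CLAIM (what is proved, stated in full; the proofs are below) =====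
def Claim_equal_get_tiles_be_removed : Prop := ∀ (t : List (List Int)), Dom_get_tiles_be_removed t → Pre_get_tiles_be_removed t → Spec_get_tiles_be_removed t (get_tiles_be_removed t)

-- ===== LEMMAS AND PROOFS =====

-- entry-level view of a grid
def entry? (g : List (List Int)) (i j : Nat) : Option Int := g[i]?.bind (fun row => row[j]?)

def map0 (o : Option Int) : Option Int := o.map (fun _ => 0)

-- in-bounds cells
def inb (p : Int × Int) : Prop := 0 ≤ p.1 ∧ p.1 < 5 ∧ 0 ≤ p.2 ∧ p.2 < 5

def cellsB : List (Int × Int) :=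
  (PySem.List.pyRange 0 5 1).flatMap (fun r => (PySem.List.pyRange 0 5 1).map (fun c => (r, c)))

def nbrsB (p : Int × Int) : List (Int × Int) :=
  [(p.1 - 1, p.2), (p.1 + 1, p.2), (p.1, p.2 - 1), (p.1, p.2 + 1)]

-- one same-value adjacency step (with respect to a fixed grid g)
def stepg (g : List (List Int)) (p q : Int × Int) : Prop :=
  inb p ∧ inb q ∧ q ∈ nbrsB p ∧ get2 g p.1 p.2 = get2 g q.1 q.2

-- explicit decidability witnesses (kept as plain defs, passed to Finset.filter by hand)
def stepgDec (g : List (List Int)) (p q : Int × Int) : Decidable (stepg g p q) := by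
  unfold stepg inb; infer_instance

def expandPredDec (g : List (List Int)) (S : Finset (Int × Int)) (q : Int × Int) :
    Decidable (∃ n ∈ S, stepg g q n) := by
  haveI : ∀ a b : Int × Int, Decidable (stepg g a b) := fun a b => stepgDec g a b
  infer_instance

def cellsF : Finset (Int × Int) := cellsB.toFinset

def expandF (g : List (List Int)) (S : Finset (Int × Int)) : Finset (Int × Int) :=
  S ∪ @Finset.filter _ (fun q => ∃ n ∈ S, stepg g q n) (expandPredDec g S) cellsF

-- the same-value component of p (as a finite set): 25 saturation steps reach the fixpoint
def KF (g : List (List Int)) (p : Int × Int) : Finset (Int × Int) := (expandF g)^[25] {p}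

def ClosedF (g : List (List Int)) (T : Finset (Int × Int)) : Prop :=
  ∀ a ∈ T, ∀ b, stepg g a b → b ∈ T

theorem mem_cellsB (p : Int × Int) : p ∈ cellsB ↔ inb p := by
  simp only [cellsB, List.mem_flatMap, List.mem_map, PySem.List.mem_pyRange_one, inb]
  constructor
  · rintro ⟨r, hr, c, hc, rfl⟩; exact ⟨hr.1, hr.2, hc.1, hc.2⟩
  · rintro ⟨h1, h2, h3, h4⟩; exact ⟨p.1, ⟨h1, h2⟩, p.2, ⟨h3, h4⟩, rfl⟩

theorem mem_cellsF (p : Int × Int) : p ∈ cellsF ↔ inb p := by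
  rw [cellsF, List.mem_toFinset]; exact mem_cellsB p

theorem nbrsB_symm (p q : Int × Int) : q ∈ nbrsB p → p ∈ nbrsB q := by
  simp only [nbrsB, List.mem_cons, List.not_mem_nil, or_false, Prod.ext_iff]
  omega

theorem stepg_symm (g : List (List Int)) (p q : Int × Int) : stepg g p q → stepg g q p := by
  rintro ⟨hp, hq, hn, hv⟩; exact ⟨hq, hp, nbrsB_symm p q hn, hv.symm⟩

theorem subset_expandF (g : List (List Int)) (S : Finset (Int × Int)) : S ⊆ expandF g S :=
  Finset.subset_union_left

theorem mem_expandF (g : List (List Int)) (S : Finset (Int × Int)) (q : Int × Int) :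
    q ∈ expandF g S ↔ q ∈ S ∨ (inb q ∧ ∃ n ∈ S, stepg g q n) := by
  letI : DecidablePred (fun q => ∃ n ∈ S, stepg g q n) := expandPredDec g S
  simp [expandF, Finset.mem_union, Finset.mem_filter, mem_cellsF, and_comm]

theorem subset_iterate_expandF (g : List (List Int)) (S : Finset (Int × Int)) :
    ∀ n, S ⊆ (expandF g)^[n] S := by
  intro n
  induction n with
  | zero => exact fun _ h => h
  | succ n ih =>
      rw [Function.iterate_succ_apply']
      exact fun x hx => subset_expandF g _ (ih hx)

theorem mem_KF_self (g : List (List Int)) (p : Int × Int) : p ∈ KF g p :=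
  subset_iterate_expandF g {p} 25 (Finset.mem_singleton_self p)

theorem expandF_subset_cells (g : List (List Int)) (S : Finset (Int × Int))
    (hS : S ⊆ cellsF) : expandF g S ⊆ cellsF := by
  letI : DecidablePred (fun q => ∃ n ∈ S, stepg g q n) := expandPredDec g S
  intro q hq
  rcases Finset.mem_union.1 hq with h | h
  · exact hS h
  · exact Finset.mem_of_mem_filter q h

theorem iterate_subset_cells (g : List (List Int)) (S : Finset (Int × Int))
    (hS : S ⊆ cellsF) : ∀ n, (expandF g)^[n] S ⊆ cellsF := by
  intro n
  induction n with
  | zero => exact hS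
  | succ n ih => rw [Function.iterate_succ_apply']; exact expandF_subset_cells g _ ih

theorem KF_subset_cells (g : List (List Int)) (p : Int × Int) (hp : inb p) :
    KF g p ⊆ cellsF := by
  have hsing : ({p} : Finset (Int × Int)) ⊆ cellsF := by
    intro x hx
    rw [Finset.mem_singleton] at hx
    subst hx
    exact (mem_cellsF x).2 hp
  exact iterate_subset_cells g {p} hsing 25

theorem expandF_subset_of_closed (g : List (List Int)) (S T : Finset (Int × Int))
    (hST : S ⊆ T) (hT : ClosedF g T) : expandF g S ⊆ T := by
  intro q hq
  rcases (mem_expandF g S q).1 hq with h | ⟨_, n, hn, hstep⟩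
  · exact hST h
  · exact hT n (hST hn) q (stepg_symm g q n hstep)

theorem KF_least (g : List (List Int)) (p : Int × Int) (T : Finset (Int × Int))
    (hpT : p ∈ T) (hT : ClosedF g T) : KF g p ⊆ T := by
  have : ∀ n, (expandF g)^[n] ({p} : Finset (Int × Int)) ⊆ T := by
    intro n
    induction n with
    | zero =>
        intro x hx
        simp only [Function.iterate_zero_apply, Finset.mem_singleton] at hx
        subst hx; exact hpT
    | succ n ih => rw [Function.iterate_succ_apply']; exact expandF_subset_of_closed g _ T ih hT
  exact this 25

theorem expandF_KF (g : List (List Int)) (p : Int × Int) (hp : inb p) :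
    expandF g (KF g p) = KF g p := by
  have hsing : ({p} : Finset (Int × Int)) ⊆ cellsF := by
    intro x hx; rw [Finset.mem_singleton] at hx; subst hx; exact (mem_cellsF x).2 hp
  have hcard : cellsF.card ≤ 25 :=
    le_trans (List.toFinset_card_le cellsB) (by decide)
  have hfix : ∃ n, n ≤ 24 ∧ expandF g ((expandF g)^[n] {p}) = (expandF g)^[n] {p} := by
    by_contra hno
    push Not at hno
    have hgrow : ∀ n, n ≤ 25 → n + 1 ≤ ((expandF g)^[n] ({p} : Finset (Int × Int))).card := by
      intro n
      induction n with
      | zero => intro _; simp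
      | succ n ih =>
          intro hn
          have h1 := ih (by omega)
          have hne := hno n (by omega)
          have hss : (expandF g)^[n] ({p} : Finset (Int × Int)) ⊂
              (expandF g)^[n+1] ({p} : Finset (Int × Int)) := by
            rw [Function.iterate_succ_apply']
            exact (subset_expandF g _).ssubset_of_ne (fun h => hne h.symm)
          have := Finset.card_lt_card hss
          omega
    have h25 := hgrow 25 (le_refl 25)
    have hle := Finset.card_le_card (iterate_subset_cells g {p} hsing 25)
    omega
  obtain ⟨n, hn, hfixn⟩ := hfix
  have hstab : ∀ m, (expandF g)^[n + m] ({p} : Finset (Int × Int)) = (expandF g)^[n] {p} := by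
    intro m
    induction m with
    | zero => rfl
    | succ m ih =>
        have : n + (m + 1) = (n + m) + 1 := by omega
        rw [this, Function.iterate_succ_apply', ih, hfixn]
  have h25 : (25 : Nat) = n + (25 - n) := by omega
  show expandF g ((expandF g)^[25] {p}) = (expandF g)^[25] {p}
  rw [h25, hstab (25 - n)]
  exact hfixn

theorem KF_closed (g : List (List Int)) (p : Int × Int) (hp : inb p) :
    ClosedF g (KF g p) := by
  intro a ha b hab
  have hb : b ∈ expandF g (KF g p) := by
    rw [mem_expandF]
    exact Or.inr ⟨hab.2.1, a, ha, stepg_symm g a b hab⟩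
  rwa [expandF_KF g p hp] at hb

theorem KF_val (g : List (List Int)) (p q : Int × Int) (hq : q ∈ KF g p) :
    get2 g q.1 q.2 = get2 g p.1 p.2 := by
  have : ∀ n, ∀ q ∈ (expandF g)^[n] ({p} : Finset (Int × Int)),
      get2 g q.1 q.2 = get2 g p.1 p.2 := by
    intro n
    induction n with
    | zero =>
        intro q hq
        simp only [Function.iterate_zero_apply, Finset.mem_singleton] at hq
        subst hq; rfl
    | succ n ih =>
        intro q hq
        rw [Function.iterate_succ_apply'] at hq
        rcases (mem_expandF g _ q).1 hq with h | ⟨_, m, hm, hstep⟩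
        · exact ih q h
        · exact hstep.2.2.2.trans (ih m hm)
  exact this 25 q hq

theorem mem_KF_symm (g : List (List Int)) (p q : Int × Int) (hq : q ∈ KF g p) :
    p ∈ KF g q := by
  have : ∀ n, ∀ q ∈ (expandF g)^[n] ({p} : Finset (Int × Int)), p ∈ KF g q := by
    intro n
    induction n with
    | zero =>
        intro q hq
        simp only [Function.iterate_zero_apply, Finset.mem_singleton] at hq
        subst hq; exact mem_KF_self g q
    | succ n ih =>
        intro q hq
        rw [Function.iterate_succ_apply'] at hq
        rcases (mem_expandF g _ q).1 hq with h | ⟨hinbq, m, hm, hstep⟩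
        · exact ih q h
        · have hmKq : m ∈ KF g q :=
            KF_closed g q hinbq q (mem_KF_self g q) m hstep
          exact KF_least g m (KF g q) hmKq (KF_closed g q hinbq) (ih m hm)
  exact this 25 q hq

theorem KF_eq_of_mem (g : List (List Int)) (p q : Int × Int) (hp : inb p) (hq : q ∈ KF g p) :
    KF g q = KF g p := by
  have hinbq : inb q := by
    have := KF_subset_cells g p hp hq; rwa [mem_cellsF] at this
  apply Finset.Subset.antisymm
  · exact KF_least g q (KF g p) hq (KF_closed g p hp)
  · exact KF_least g p (KF g q) (mem_KF_symm g p q hq) (KF_closed g q hinbq)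

theorem get2_entry? (g : List (List Int)) (r c : Int) :
    get2 g r c = (entry? g r.toNat c.toNat).getD 0 := by
  cases h : g[r.toNat]? with
  | none =>
      have hd : g.getD r.toNat [] = [] := by rw [List.getD_eq_getElem?_getD, h]; rfl
      rw [get2, entry?, hd, h]; simp
  | some row =>
      have hd : g.getD r.toNat [] = row := by rw [List.getD_eq_getElem?_getD, h]; rfl
      rw [get2, entry?, hd, h]; simp [List.getD_eq_getElem?_getD]

theorem inb_toNat_eq (x : Int × Int) (hx : inb x) (i j : Nat) :
    (x.1.toNat = i ∧ x.2.toNat = j) ↔ x = ((i : Int), (j : Int)) := by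
  obtain ⟨h1, _, h3, _⟩ := hx
  rw [Prod.ext_iff]
  omega

theorem map0_map0 (o : Option Int) : map0 (map0 o) = map0 o := by
  cases o <;> rfl

theorem entry?_set2 (g : List (List Int)) (r c : Int) (i j : Nat) :
    entry? (set2 g r c 0) i j =
      if r.toNat = i ∧ c.toNat = j then map0 (entry? g i j) else entry? g i j := by
  rw [set2, entry?, entry?, map0, List.getElem?_set]
  by_cases hi : r.toNat = i
  · rw [if_pos hi]
    subst hi
    by_cases hlen : r.toNat < g.length
    · rw [if_pos hlen]
      have hrow : g.getD r.toNat [] = g[r.toNat] := by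
        rw [List.getD_eq_getElem?_getD, List.getElem?_eq_getElem hlen]; rfl
      rw [hrow, List.getElem?_eq_getElem hlen]
      simp only [Option.bind_some]
      rw [List.getElem?_set]
      by_cases hj : c.toNat = j
      · subst hj
        rw [if_pos rfl]
        by_cases hjl : c.toNat < (g[r.toNat]'hlen).length
        · rw [if_pos hjl, List.getElem?_eq_getElem hjl]
          simp
        · rw [if_neg hjl, List.getElem?_eq_none (by omega)]
          simp
      · rw [if_neg hj]
        simp [hj]
    · rw [if_neg hlen, List.getElem?_eq_none (by omega)]
      simp
  · rw [if_neg hi, if_neg (fun h => hi h.1)]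

theorem length_set2 (g : List (List Int)) (r c : Int) (x : Int) :
    (set2 g r c x).length = g.length := by
  rw [set2, List.length_set]

-- ===== A-side: the visited grid =====

def Shape (v : List (List Bool)) : Prop :=
  v.length = 5 ∧ ∀ (i : Nat) (h : i < v.length), (v[i]).length = 5

def vis0 : List (List Bool) := List.replicate 5 (List.replicate 5 false)

theorem shape_vis0 : Shape vis0 := by
  constructor
  · simp [vis0]
  · intro i h
    simp only [vis0, List.getElem_replicate, List.length_replicate]

theorem get2b_elem (v : List (List Bool)) (_hS : Shape v) (r c : Int) (_h : inb (r, c)) :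
    ∀ (hr : r.toNat < v.length) (hc : c.toNat < (v[r.toNat]).length),
    get2b v r c = v[r.toNat][c.toNat] := by
  intro hr hc
  rw [get2b]
  have h1 : v.getD r.toNat [] = v[r.toNat] := by
    rw [List.getD_eq_getElem?_getD, List.getElem?_eq_getElem hr]; rfl
  rw [h1, List.getD_eq_getElem?_getD, List.getElem?_eq_getElem hc]
  rfl

theorem get2b_vis0 (r c : Int) (h : inb (r, c)) : get2b vis0 r c = false := by
  obtain ⟨h1, h2, h3, h4⟩ := h
  have hr : r.toNat < vis0.length := by simp only [vis0, List.length_replicate]; omega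
  have hc : c.toNat < (vis0[r.toNat]).length := by
    simp only [vis0, List.getElem_replicate, List.length_replicate]; omega
  rw [get2b_elem vis0 shape_vis0 r c ⟨h1, h2, h3, h4⟩ hr hc]
  simp only [vis0, List.getElem_replicate]

theorem shape_set2b (v : List (List Bool)) (hS : Shape v) (r c : Int) :
    Shape (set2b v r c) := by
  obtain ⟨hlen, hrow⟩ := hS
  constructor
  · rw [set2b, List.length_set]; exact hlen
  · intro i h
    rw [set2b, List.length_set] at h
    simp only [set2b, List.getElem_set]
    split
    · rename_i heq
      have hget : v.getD r.toNat [] = v[r.toNat] := by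
        rw [List.getD_eq_getElem?_getD, List.getElem?_eq_getElem (heq ▸ h)]; rfl
      rw [hget, List.length_set]
      exact heq ▸ hrow r.toNat (heq ▸ h)
    · exact hrow i h

theorem get2b_set2b (v : List (List Bool)) (hS : Shape v) (p x : Int × Int)
    (hp : inb p) (hx : inb x) :
    get2b (set2b v p.1 p.2) x.1 x.2 = if x = p then true else get2b v x.1 x.2 := by
  obtain ⟨hlen, hrowlen⟩ := hS
  obtain ⟨hp1, hp2, hp3, hp4⟩ := hp
  obtain ⟨hx1, hx2, hx3, hx4⟩ := hx
  have hpr : p.1.toNat < v.length := by omega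
  have hpc : p.2.toNat < (v[p.1.toNat]).length := by rw [hrowlen p.1.toNat hpr]; omega
  have hxr : x.1.toNat < v.length := by omega
  have hrowget : v.getD p.1.toNat [] = v[p.1.toNat] := by
    rw [List.getD_eq_getElem?_getD, List.getElem?_eq_getElem hpr]; rfl
  have hS' : Shape (set2b v p.1 p.2) := shape_set2b v ⟨hlen, hrowlen⟩ p.1 p.2
  have hxr' : x.1.toNat < (set2b v p.1 p.2).length := by rw [hS'.1]; omega
  have hxc' : x.2.toNat < ((set2b v p.1 p.2)[x.1.toNat]).length := by
    rw [hS'.2 x.1.toNat hxr']; omega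
  rw [get2b_elem _ hS' x.1 x.2 ⟨hx1, hx2, hx3, hx4⟩ hxr' hxc']
  by_cases hrr : x.1.toNat = p.1.toNat
  · have hxrow : ∀ (hh : x.1.toNat < (set2b v p.1 p.2).length),
        (set2b v p.1 p.2)[x.1.toNat] = (v[p.1.toNat]).set p.2.toNat true := by
      intro hh
      simp only [set2b, List.getElem_set]
      rw [if_pos hrr.symm, hrowget]
    simp only [hxrow hxr']
    by_cases hcc : x.2.toNat = p.2.toNat
    · have hxp : x = p := by rw [Prod.ext_iff]; omega
      rw [if_pos hxp]
      simp [hcc]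
    · have hxp : x ≠ p := by intro h; subst h; omega
      rw [if_neg hxp]
      simp only [List.getElem_set]
      rw [if_neg (fun h => hcc h.symm)]
      rw [get2b_elem v ⟨hlen, hrowlen⟩ x.1 x.2 ⟨hx1, hx2, hx3, hx4⟩ hxr
        (by rw [hrowlen x.1.toNat hxr]; omega)]
      simp only [hrr]
  · have hxp : x ≠ p := by intro h; subst h; omega
    rw [if_neg hxp]
    have hxrow : ∀ (hh : x.1.toNat < (set2b v p.1 p.2).length),
        (set2b v p.1 p.2)[x.1.toNat] = v[x.1.toNat] := by
      intro hh
      simp only [set2b, List.getElem_set]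
      rw [if_neg (fun h => hrr h.symm)]
    simp only [hxrow hxr']
    rw [get2b_elem v ⟨hlen, hrowlen⟩ x.1 x.2 ⟨hx1, hx2, hx3, hx4⟩ hxr
      (by rw [hrowlen x.1.toNat hxr]; omega)]

def VisSet (v : List (List Bool)) : Finset (Int × Int) :=
  cellsF.filter (fun p => get2b v p.1 p.2 = true)

theorem mem_VisSet (v : List (List Bool)) (x : Int × Int) :
    x ∈ VisSet v ↔ inb x ∧ get2b v x.1 x.2 = true := by
  rw [VisSet, Finset.mem_filter, mem_cellsF]

theorem VisSet_vis0 : VisSet vis0 = ∅ := by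
  ext x
  rw [mem_VisSet]
  simp only [Finset.notMem_empty, iff_false, not_and]
  intro hx
  rw [get2b_vis0 x.1 x.2 hx]
  simp

theorem VisSet_set2b (v : List (List Bool)) (hS : Shape v) (p : Int × Int) (hp : inb p) :
    VisSet (set2b v p.1 p.2) = insert p (VisSet v) := by
  ext x
  rw [mem_VisSet, Finset.mem_insert, mem_VisSet]
  by_cases hx : inb x
  · rw [get2b_set2b v hS p x hp hx]
    by_cases hxp : x = p
    · simp [hxp, hp]
    · simp [hxp, hx]
  · have hxp : x ≠ p := fun h => hx (h ▸ hp)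
    simp [hx, hxp]


-- ===== A-side: BFS correctness =====

-- context of one bfs call: V = already-visited cells, s = start cell
def Ctx (g0 gcur : List (List Int)) (V : Finset (Int × Int)) (s : Int × Int) : Prop :=
  ClosedF g0 V ∧ (∀ p : Int × Int, inb p → p ∉ V → get2 gcur p.1 p.2 = get2 g0 p.1 p.2) ∧
  inb s ∧ s ∉ V

theorem not_mem_V (g0 : List (List Int)) (V : Finset (Int × Int)) (s : Int × Int)
    (hcl : ClosedF g0 V) (hsV : s ∉ V) (a : Int × Int) (ha : a ∈ KF g0 s) : a ∉ V := by
  intro haV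
  exact hsV (KF_least g0 a V haV hcl (mem_KF_symm g0 s a ha))

theorem nbrs_drdc (x b : Int × Int) :
    b ∈ nbrsB x ↔ ∃ d ∈ drdc, b = (x.1 + d.1, x.2 + d.2) := by
  simp only [nbrsB, drdc, List.mem_cons, List.not_mem_nil, or_false]
  constructor
  · rintro (rfl | rfl | rfl | rfl)
    · exact ⟨(-1, 0), by norm_num, by simp [Prod.ext_iff]; ring⟩
    · exact ⟨(1, 0), by norm_num, by simp⟩
    · exact ⟨(0, -1), by norm_num, by simp [Prod.ext_iff]; ring⟩
    · exact ⟨(0, 1), by norm_num, by simp⟩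
  · rintro ⟨d, (rfl | rfl | rfl | rfl), rfl⟩ <;> simp [Prod.ext_iff] <;> omega

-- invariant of the inner `for dr, dc in drdc` fold
def CoreS (g0 : List (List Int)) (s : Int × Int) (V : Finset (Int × Int))
    (routes0 : List (Int × Int)) (st : BfsS) : Prop :=
  Shape st.2.1 ∧ VisSet st.2.1 = V ∪ st.1.toFinset ∧ st.1.Nodup ∧
  (∀ q ∈ st.1, q ∈ KF g0 s) ∧ s ∈ st.1 ∧ st.1 = routes0 ++ st.2.2

set_option maxHeartbeats 1000000 in
theorem bfsDir_spec (g0 gcur : List (List Int)) (V : Finset (Int × Int)) (s : Int × Int)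
    (routes0 : List (Int × Int)) (hc : Ctx g0 gcur V s) (x : Int × Int) (hx : x ∈ KF g0 s)
    (st : BfsS) (d : Int × Int) (hd : d ∈ drdc) (hcore : CoreS g0 s V routes0 st) :
    CoreS g0 s V routes0 (bfsDir gcur s.1 s.2 x.1 x.2 st d) ∧
    (∀ q ∈ st.1, q ∈ (bfsDir gcur s.1 s.2 x.1 x.2 st d).1) ∧
    (∀ b : Int × Int, b = (x.1 + d.1, x.2 + d.2) → stepg g0 x b →
      b ∈ (bfsDir gcur s.1 s.2 x.1 x.2 st d).1) := by
  obtain ⟨hcl, hagree, hs, hsV⟩ := hc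
  have hinbx : inb x := (mem_cellsF x).1 (KF_subset_cells g0 s hs hx)
  obtain ⟨hSh, hVis, hnd, hKF, hsmem, heqr⟩ := hcore
  unfold bfsDir
  split
  · rename_i hg
    refine ⟨⟨hSh, hVis, hnd, hKF, hsmem, heqr⟩, fun q hq => hq, ?_⟩
    rintro b rfl hstep
    have hinbb : inb ((x.1 + d.1, x.2 + d.2) : Int × Int) := hstep.2.1
    have hbKF : (x.1 + d.1, x.2 + d.2) ∈ KF g0 s := KF_closed g0 s hs x hx _ hstep
    have hbnotV : (x.1 + d.1, x.2 + d.2) ∉ V := not_mem_V g0 V s hcl hsV _ hbKF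
    by_cases hbv : get2b st.2.1 (x.1 + d.1) (x.2 + d.2) = true
    · have hbVis : ((x.1 + d.1, x.2 + d.2) : Int × Int) ∈ VisSet st.2.1 :=
        (mem_VisSet _ _).2 ⟨hinbb, hbv⟩
      rw [hVis] at hbVis
      rcases Finset.mem_union.1 hbVis with h | h
      · exact absurd h hbnotV
      · exact List.mem_toFinset.1 h
    · exfalso
      obtain ⟨h1, h2, h3, h4⟩ := hinbb
      have hval : get2 gcur (x.1 + d.1) (x.2 + d.2) = get2 gcur s.1 s.2 := by
        calc get2 gcur (x.1 + d.1) (x.2 + d.2)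
            = get2 g0 (x.1 + d.1) (x.2 + d.2) := hagree _ hstep.2.1 hbnotV
          _ = get2 g0 x.1 x.2 := hstep.2.2.2.symm
          _ = get2 g0 s.1 s.2 := KF_val g0 s x hx
          _ = get2 gcur s.1 s.2 := (hagree s hs hsV).symm
      have h1' : (0:Int) ≤ x.1 + d.1 := h1
      have h2' : x.1 + d.1 < 5 := h2
      have h3' : (0:Int) ≤ x.2 + d.2 := h3
      have h4' : x.2 + d.2 < 5 := h4
      rcases hg with h | h | h | h | h | h
      · omega
      · omega
      · omega
      · omega
      · exact hbv h
      · exact h hval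
  · rename_i hg
    push Not at hg
    obtain ⟨hb1, hb2, hb3, hb4, hbv, hveq⟩ := hg
    have hbvf : get2b st.2.1 (x.1 + d.1) (x.2 + d.2) = false := by
      rcases Bool.eq_false_or_eq_true (get2b st.2.1 (x.1 + d.1) (x.2 + d.2)) with h | h
      · exact absurd h hbv
      · exact h
    have hinbb : inb ((x.1 + d.1, x.2 + d.2) : Int × Int) := ⟨by omega, by omega, by omega, by omega⟩
    have hbnotVis : ((x.1 + d.1, x.2 + d.2) : Int × Int) ∉ VisSet st.2.1 := by
      intro hmem
      rw [mem_VisSet] at hmem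
      rw [hmem.2] at hbvf
      cases hbvf
    have hbnotV : ((x.1 + d.1, x.2 + d.2) : Int × Int) ∉ V := by
      intro hmem
      exact hbnotVis (by rw [hVis]; exact Finset.mem_union_left _ hmem)
    have hstep : stepg g0 x (x.1 + d.1, x.2 + d.2) := by
      refine ⟨hinbx, hinbb, (nbrs_drdc x _).2 ⟨d, hd, rfl⟩, ?_⟩
      calc get2 g0 x.1 x.2 = get2 g0 s.1 s.2 := KF_val g0 s x hx
        _ = get2 gcur s.1 s.2 := (hagree s hs hsV).symm
        _ = get2 gcur (x.1 + d.1) (x.2 + d.2) := hveq.symm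
        _ = get2 g0 (x.1 + d.1) (x.2 + d.2) := hagree _ hinbb hbnotV
    have hbKF : ((x.1 + d.1, x.2 + d.2) : Int × Int) ∈ KF g0 s := KF_closed g0 s hs x hx _ hstep
    have hbnotRoutes : ((x.1 + d.1, x.2 + d.2) : Int × Int) ∉ st.1 := by
      intro hmem
      exact hbnotVis (by rw [hVis]; exact Finset.mem_union_right _ (List.mem_toFinset.2 hmem))
    have c1 : Shape (set2b st.2.1 (x.1 + d.1) (x.2 + d.2)) := shape_set2b _ hSh _ _
    have c2 : VisSet (set2b st.2.1 (x.1 + d.1) (x.2 + d.2)) =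
        V ∪ (st.1 ++ [(x.1 + d.1, x.2 + d.2)]).toFinset := by
      rw [VisSet_set2b st.2.1 hSh _ hinbb, hVis]
      ext y
      simp only [Finset.mem_insert, Finset.mem_union, List.mem_toFinset, List.mem_append,
        List.mem_singleton]
      constructor
      · rintro (h | h | h)
        · exact Or.inr (Or.inr h)
        · exact Or.inl h
        · exact Or.inr (Or.inl h)
      · rintro (h | h | h)
        · exact Or.inr (Or.inl h)
        · exact Or.inr (Or.inr h)
        · exact Or.inl h
    have c3 : (st.1 ++ [(x.1 + d.1, x.2 + d.2)]).Nodup := by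
      refine List.Nodup.append hnd (List.nodup_singleton _) ?_
      intro q hq hq'
      rw [List.mem_singleton] at hq'
      subst hq'
      exact hbnotRoutes hq
    have c4 : ∀ q ∈ st.1 ++ [(x.1 + d.1, x.2 + d.2)], q ∈ KF g0 s := by
      intro q hq
      rcases List.mem_append.1 hq with h | h
      · exact hKF q h
      · rw [List.mem_singleton] at h; subst h; exact hbKF
    have c5 : s ∈ st.1 ++ [(x.1 + d.1, x.2 + d.2)] := List.mem_append_left _ hsmem
    have c6 : st.1 ++ [(x.1 + d.1, x.2 + d.2)] = routes0 ++ (st.2.2 ++ [(x.1 + d.1, x.2 + d.2)]) := by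
      rw [heqr, List.append_assoc]
    exact ⟨⟨c1, c2, c3, c4, c5, c6⟩, fun q hq => List.mem_append_left _ hq,
      fun b hb _ => hb ▸ List.mem_append_right _ (List.mem_singleton.2 rfl)⟩


def BfsInv (g0 : List (List Int)) (s : Int × Int) (V : Finset (Int × Int))
    (dq : List (Int × Int)) (vis : List (List Bool)) (routes : List (Int × Int)) : Prop :=
  Shape vis ∧ VisSet vis = V ∪ routes.toFinset ∧ routes.Nodup ∧
  (∀ q ∈ routes, q ∈ KF g0 s) ∧ s ∈ routes ∧ (∀ q ∈ dq, q ∈ routes) ∧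
  (∀ a ∈ routes, a ∉ dq → ∀ b, stepg g0 a b → b ∈ routes)

theorem bfsLoop_spec (g0 gcur : List (List Int)) (V : Finset (Int × Int)) (s : Int × Int)
    (hc : Ctx g0 gcur V s) :
    ∀ dq vis routes, BfsInv g0 s V dq vis routes →
      (bfsLoop gcur s.1 s.2 dq vis routes).1.Nodup ∧
      (bfsLoop gcur s.1 s.2 dq vis routes).1.toFinset = KF g0 s ∧
      Shape (bfsLoop gcur s.1 s.2 dq vis routes).2 ∧
      VisSet (bfsLoop gcur s.1 s.2 dq vis routes).2 = V ∪ KF g0 s := by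
  intro dq vis routes
  induction dq, vis, routes using bfsLoop.induct gcur s.1 s.2 with
  | case1 vis routes =>
    intro hinv
    obtain ⟨hSh, hVis, hnd, hKF, hsmem, hdq, hfr⟩ := hinv
    rw [bfsLoop]
    have hclosed : ClosedF g0 routes.toFinset := by
      intro a ha b hb
      exact List.mem_toFinset.2 (hfr a (List.mem_toFinset.1 ha) (by simp) b hb)
    have hKFsub : KF g0 s ⊆ routes.toFinset :=
      KF_least g0 s _ (List.mem_toFinset.2 hsmem) hclosed
    have hsub : routes.toFinset ⊆ KF g0 s := fun q hq => hKF q (List.mem_toFinset.1 hq)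
    have heq : routes.toFinset = KF g0 s := Finset.Subset.antisymm hsub hKFsub
    exact ⟨hnd, heq, hSh, by rw [hVis, heq]⟩
  | case2 vis routes cr cc dq' st ih =>
    intro hinv
    obtain ⟨hSh, hVis, hnd, hKF, hsmem, hdq, hfr⟩ := hinv
    have hxr : ((cr, cc) : Int × Int) ∈ routes := hdq _ (by simp)
    have hxKF : ((cr, cc) : Int × Int) ∈ KF g0 s := hKF _ hxr
    have hcore0 : CoreS g0 s V routes (routes, vis, []) :=
      ⟨hSh, hVis, hnd, hKF, hsmem, (List.append_nil routes).symm⟩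
    have h1 := bfsDir_spec g0 gcur V s routes hc (cr, cc) hxKF (routes, vis, [])
      (1, 0) (by simp [drdc]) hcore0
    have h2 := bfsDir_spec g0 gcur V s routes hc (cr, cc) hxKF _ (-1, 0) (by simp [drdc]) h1.1
    have h3 := bfsDir_spec g0 gcur V s routes hc (cr, cc) hxKF _ (0, 1) (by simp [drdc]) h2.1
    have h4 := bfsDir_spec g0 gcur V s routes hc (cr, cc) hxKF _ (0, -1) (by simp [drdc]) h3.1
    obtain ⟨hSh4, hVis4, hnd4, hKF4, hsmem4, heq4⟩ := h4.1
    have hcov : ∀ b : Int × Int, stepg g0 (cr, cc) b →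
        b ∈ (bfsDir gcur s.1 s.2 (cr, cc).1 (cr, cc).2
          (bfsDir gcur s.1 s.2 (cr, cc).1 (cr, cc).2
            (bfsDir gcur s.1 s.2 (cr, cc).1 (cr, cc).2
              (bfsDir gcur s.1 s.2 (cr, cc).1 (cr, cc).2 (routes, vis, []) (1, 0))
              (-1, 0)) (0, 1)) (0, -1)).1 := by
      intro b hb
      have hnb := hb.2.2.1
      rw [nbrs_drdc] at hnb
      obtain ⟨d, hd, rfl⟩ := hnb
      have hd' : d = ((1:Int), (0:Int)) ∨ d = ((-1:Int), (0:Int)) ∨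
          d = ((0:Int), (1:Int)) ∨ d = ((0:Int), (-1:Int)) := by
        simpa [drdc] using hd
      rcases hd' with rfl | rfl | rfl | rfl
      · exact h4.2.1 _ (h3.2.1 _ (h2.2.1 _ (h1.2.2 _ rfl hb)))
      · exact h4.2.1 _ (h3.2.1 _ (h2.2.2 _ rfl hb))
      · exact h4.2.1 _ (h3.2.2 _ rfl hb)
      · exact h4.2.2 _ rfl hb
    have hinv' : BfsInv g0 s V
        (dq' ++ (bfsDir gcur s.1 s.2 (cr, cc).1 (cr, cc).2
          (bfsDir gcur s.1 s.2 (cr, cc).1 (cr, cc).2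
            (bfsDir gcur s.1 s.2 (cr, cc).1 (cr, cc).2
              (bfsDir gcur s.1 s.2 (cr, cc).1 (cr, cc).2 (routes, vis, []) (1, 0))
              (-1, 0)) (0, 1)) (0, -1)).2.2)
        (bfsDir gcur s.1 s.2 (cr, cc).1 (cr, cc).2
          (bfsDir gcur s.1 s.2 (cr, cc).1 (cr, cc).2
            (bfsDir gcur s.1 s.2 (cr, cc).1 (cr, cc).2
              (bfsDir gcur s.1 s.2 (cr, cc).1 (cr, cc).2 (routes, vis, []) (1, 0))
              (-1, 0)) (0, 1)) (0, -1)).2.1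
        (bfsDir gcur s.1 s.2 (cr, cc).1 (cr, cc).2
          (bfsDir gcur s.1 s.2 (cr, cc).1 (cr, cc).2
            (bfsDir gcur s.1 s.2 (cr, cc).1 (cr, cc).2
              (bfsDir gcur s.1 s.2 (cr, cc).1 (cr, cc).2 (routes, vis, []) (1, 0))
              (-1, 0)) (0, 1)) (0, -1)).1 := by
      refine ⟨hSh4, hVis4, hnd4, hKF4, hsmem4, ?_, ?_⟩
      · intro q hq
        rcases List.mem_append.1 hq with h | h
        · have hq' : q ∈ routes := hdq q (List.mem_cons_of_mem _ h)
          exact h4.2.1 q (h3.2.1 q (h2.2.1 q (h1.2.1 q hq')))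
        · rw [heq4]
          exact List.mem_append_right _ h
      · intro a ha hnotin b hb
        by_cases hax : a = (cr, cc)
        · subst hax
          exact hcov b hb
        · have haroutes : a ∈ routes := by
            rw [heq4] at ha
            rcases List.mem_append.1 ha with h | h
            · exact h
            · exact absurd (List.mem_append_right dq' h) hnotin
          have hbr : b ∈ routes := by
            refine hfr a haroutes ?_ b hb
            intro hmem
            rcases List.mem_cons.1 hmem with h | h
            · exact hax h
            · exact hnotin (List.mem_append_left _ h)
          exact h4.2.1 b (h3.2.1 b (h2.2.1 b (h1.2.1 b hbr)))
    have hres := ih hinv'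
    rw [bfsLoop]
    exact hres


theorem bfs_spec (g0 gcur : List (List Int)) (V : Finset (Int × Int)) (s : Int × Int)
    (hc : Ctx g0 gcur V s) (vis : List (List Bool)) (hS : Shape vis) (hV : VisSet vis = V) :
    (bfs gcur s.1 s.2 vis).1.Nodup ∧
    (bfs gcur s.1 s.2 vis).1.toFinset = KF g0 s ∧
    Shape (bfs gcur s.1 s.2 vis).2 ∧
    VisSet (bfs gcur s.1 s.2 vis).2 = V ∪ KF g0 s := by
  obtain ⟨hcl, hagree, hs, hsV⟩ := hc
  rw [bfs]
  apply bfsLoop_spec g0 gcur V s ⟨hcl, hagree, hs, hsV⟩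
  refine ⟨shape_set2b vis hS s.1 s.2, ?_, List.nodup_singleton _, ?_, ?_, ?_, ?_⟩
  · rw [show set2b vis s.1 s.2 = set2b vis (s.1, s.2).1 (s.1, s.2).2 from rfl,
      VisSet_set2b vis hS s hs, hV]
    ext y
    simp only [Finset.mem_insert, Finset.mem_union, List.mem_toFinset, List.mem_singleton]
    tauto
  · intro q hq
    rw [List.mem_singleton] at hq
    subst hq
    exact mem_KF_self g0 s
  · exact List.mem_singleton.2 rfl
  · intro q hq
    exact hq
  · intro a ha hnotin b hb
    exact absurd ha hnotin

-- ===== A-side: unconditional zero-writing fold =====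
theorem entry?_zeroFold :
    ∀ (l : List (Int × Int)) (g : List (List Int)) (i j : Nat), (∀ q ∈ l, inb q) →
    entry? (l.foldl (fun g q => set2 g q.1 q.2 0) g) i j =
      if ((i : Int), (j : Int)) ∈ l then map0 (entry? g i j) else entry? g i j := by
  intro l
  induction l with
  | nil => intro g i j _; simp
  | cons x l ih =>
      intro g i j hinb
      rw [List.foldl_cons, ih _ i j (fun q hq => hinb q (List.mem_cons_of_mem x hq))]
      by_cases hm : ((i : Int), (j : Int)) ∈ l
      · rw [if_pos hm, if_pos (List.mem_cons_of_mem x hm), entry?_set2]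
        split
        · rw [map0_map0]
        · rfl
      · rw [if_neg hm, entry?_set2]
        by_cases hx : x = ((i : Int), (j : Int))
        · rw [if_pos (((inb_toNat_eq x (hinb x (List.mem_cons_self)) i j)).2 hx),
            if_pos (by rw [hx] at *; exact List.mem_cons_self)]
        · have hnotc : ((i : Int), (j : Int)) ∉ x :: l := by
            intro h
            rcases List.mem_cons.1 h with h | h
            · exact hx h.symm
            · exact hm h
          rw [if_neg (fun h => hx (((inb_toNat_eq x (hinb x (List.mem_cons_self)) i j)).1 h)),
            if_neg hnotc]

theorem length_zeroFold :
    ∀ (l : List (Int × Int)) (g : List (List Int)),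
    (l.foldl (fun g q => set2 g q.1 q.2 0) g).length = g.length := by
  intro l
  induction l with
  | nil => intro g; rfl
  | cons x l ih => intro g; rw [List.foldl_cons, ih, length_set2]

-- ===== A-side: the outer double loop =====
def OutInv (g0 : List (List Int)) (st : List (List Int) × List (List Bool))
    (V : Finset (Int × Int)) : Prop :=
  Shape st.2 ∧ VisSet st.2 = V ∧ ClosedF g0 V ∧ V ⊆ cellsF ∧
  st.1.length = g0.length ∧
  (∀ i j : Nat, entry? st.1 i j =
    if ((i : Int), (j : Int)) ∈ V ∧ 3 ≤ (KF g0 ((i : Int), (j : Int))).card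
    then map0 (entry? g0 i j) else entry? g0 i j)

theorem outInv_agree (g0 : List (List Int)) (st : List (List Int) × List (List Bool))
    (V : Finset (Int × Int)) (h : OutInv g0 st V) :
    ∀ p : Int × Int, inb p → p ∉ V → get2 st.1 p.1 p.2 = get2 g0 p.1 p.2 := by
  intro p hp hpV
  obtain ⟨h1, h2, h3, h4, h5, h6⟩ := h
  rw [get2_entry?, get2_entry?, h6]
  have hpe : ((p.1.toNat : Int), (p.2.toNat : Int)) = p := by
    obtain ⟨a, b, c, d⟩ := hp
    rw [Prod.ext_iff]
    omega
  rw [if_neg (fun hcon => hpV (hpe ▸ hcon.1))]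

theorem outer_step_spec (g0 : List (List Int)) (st : List (List Int) × List (List Bool))
    (V : Finset (Int × Int)) (p : Int × Int) (hp : inb p) (hInv : OutInv g0 st V) :
    ∃ V', OutInv g0 (outerStep st p) V' ∧ V ⊆ V' ∧ p ∈ V' := by
  obtain ⟨hSh, hVis, hCl, hVc, hLen, hEnt⟩ := hInv
  rw [outerStep]
  by_cases hv : get2b st.2 p.1 p.2 = true
  · rw [if_pos hv]
    exact ⟨V, ⟨hSh, hVis, hCl, hVc, hLen, hEnt⟩, Finset.Subset.refl V,
      hVis ▸ (mem_VisSet st.2 p).2 ⟨hp, hv⟩⟩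
  · rw [if_neg hv]
    have hpV : p ∉ V := by
      intro hmem
      rw [← hVis, mem_VisSet] at hmem
      exact hv hmem.2
    have hctx : Ctx g0 st.1 V p :=
      ⟨hCl, outInv_agree g0 st V ⟨hSh, hVis, hCl, hVc, hLen, hEnt⟩, hp, hpV⟩
    obtain ⟨hnd, hfs, hSh', hVis'⟩ := bfs_spec g0 st.1 V p hctx st.2 hSh hVis
    have hroutesKF : ∀ q ∈ (bfs st.1 p.1 p.2 st.2).1, q ∈ KF g0 p := by
      intro q hq
      rw [← hfs]
      exact List.mem_toFinset.2 hq
    have hrinb : ∀ q ∈ (bfs st.1 p.1 p.2 st.2).1, inb q := by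
      intro q hq
      exact (mem_cellsF q).1 (KF_subset_cells g0 p hp (hroutesKF q hq))
    have hlenroutes : (bfs st.1 p.1 p.2 st.2).1.length = (KF g0 p).card := by
      rw [← hfs, List.toFinset_card_of_nodup hnd]
    refine ⟨V ∪ KF g0 p, ?_, Finset.subset_union_left, Finset.mem_union_right _ (mem_KF_self g0 p)⟩
    have hCl' : ClosedF g0 (V ∪ KF g0 p) := by
      intro a ha b hb
      rcases Finset.mem_union.1 ha with h | h
      · exact Finset.mem_union_left _ (hCl a h b hb)
      · exact Finset.mem_union_right _ (KF_closed g0 p hp a h b hb)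
    have hVc' : V ∪ KF g0 p ⊆ cellsF :=
      Finset.union_subset hVc (KF_subset_cells g0 p hp)
    show OutInv g0
        (if 3 ≤ (bfs st.1 p.1 p.2 st.2).1.length
         then List.foldl (fun g q => set2 g q.1 q.2 0) st.1 (bfs st.1 p.1 p.2 st.2).1
         else st.1, (bfs st.1 p.1 p.2 st.2).2) (V ∪ KF g0 p)
    by_cases h3 : 3 ≤ (bfs st.1 p.1 p.2 st.2).1.length
    · rw [if_pos h3]
      refine ⟨hSh', hVis', hCl', hVc', ?_, ?_⟩
      · rw [length_zeroFold, hLen]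
      · intro i j
        rw [entry?_zeroFold _ _ i j hrinb, hEnt i j]
        have hmemiff : ((i : Int), (j : Int)) ∈ (bfs st.1 p.1 p.2 st.2).1 ↔
            ((i : Int), (j : Int)) ∈ KF g0 p := by
          rw [← hfs, ← List.mem_toFinset]
        by_cases hq : ((i : Int), (j : Int)) ∈ KF g0 p
        · rw [if_pos (hmemiff.2 hq)]
          have hKeq : KF g0 ((i : Int), (j : Int)) = KF g0 p := KF_eq_of_mem g0 p _ hp hq
          have hqV : ((i : Int), (j : Int)) ∉ V := not_mem_V g0 V p hCl hpV _ hq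
          rw [if_neg (fun hcon => hqV hcon.1), if_pos ⟨Finset.mem_union_right _ hq, by
            rw [hKeq, ← hlenroutes]; exact h3⟩]
        · rw [if_neg (fun hcon => hq (hmemiff.1 hcon))]
          have hViff : ((i : Int), (j : Int)) ∈ V ∪ KF g0 p ↔ ((i : Int), (j : Int)) ∈ V := by
            constructor
            · intro h
              rcases Finset.mem_union.1 h with h | h
              · exact h
              · exact absurd h hq
            · exact fun h => Finset.mem_union_left _ h
          by_cases hcond : ((i : Int), (j : Int)) ∈ V ∧ 3 ≤ (KF g0 ((i : Int), (j : Int))).card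
          · rw [if_pos hcond, if_pos ⟨hViff.2 hcond.1, hcond.2⟩]
          · rw [if_neg hcond, if_neg (fun hcon => hcond ⟨hViff.1 hcon.1, hcon.2⟩)]
    · rw [if_neg h3]
      refine ⟨hSh', hVis', hCl', hVc', hLen, ?_⟩
      intro i j
      rw [hEnt i j]
      by_cases hq : ((i : Int), (j : Int)) ∈ KF g0 p
      · have hqV : ((i : Int), (j : Int)) ∉ V := not_mem_V g0 V p hCl hpV _ hq
        have hKeq : KF g0 ((i : Int), (j : Int)) = KF g0 p := KF_eq_of_mem g0 p _ hp hq
        rw [if_neg (fun hcon => hqV hcon.1), if_neg (fun hcon => h3 (by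
          rw [hlenroutes, ← hKeq]; exact hcon.2))]
      · have hViff : ((i : Int), (j : Int)) ∈ V ∪ KF g0 p ↔ ((i : Int), (j : Int)) ∈ V := by
          constructor
          · intro h
            rcases Finset.mem_union.1 h with h | h
            · exact h
            · exact absurd h hq
          · exact fun h => Finset.mem_union_left _ h
        by_cases hcond : ((i : Int), (j : Int)) ∈ V ∧ 3 ≤ (KF g0 ((i : Int), (j : Int))).card
        · rw [if_pos hcond, if_pos ⟨hViff.2 hcond.1, hcond.2⟩]
        · rw [if_neg hcond, if_neg (fun hcon => hcond ⟨hViff.1 hcon.1, hcon.2⟩)]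

theorem outer_fold_spec (g0 : List (List Int)) :
    ∀ (l : List (Int × Int)) (st : List (List Int) × List (List Bool)) (V : Finset (Int × Int)),
    (∀ q ∈ l, inb q) → OutInv g0 st V →
    ∃ V', OutInv g0 (l.foldl outerStep st) V' ∧ V ⊆ V' ∧ ∀ q ∈ l, q ∈ V' := by
  intro l
  induction l with
  | nil =>
      intro st V _ hInv
      exact ⟨V, hInv, Finset.Subset.refl V, by simp⟩
  | cons x l ih =>
      intro st V hinb hInv
      obtain ⟨V1, hInv1, hsub1, hx1⟩ := outer_step_spec g0 st V x (hinb x List.mem_cons_self) hInv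
      obtain ⟨V', hInv', hsub', hall⟩ := ih (outerStep st x) V1
        (fun q hq => hinb q (List.mem_cons_of_mem x hq)) hInv1
      refine ⟨V', hInv', Finset.Subset.trans hsub1 hsub', ?_⟩
      intro q hq
      rcases List.mem_cons.1 hq with rfl | hq'
      · exact hsub' hx1
      · exact hall q hq'

-- ===== A-side final characterization =====
theorem A_eq_fold (t : List (List Int)) :
    get_tiles_be_removed t = (cellsB.foldl outerStep (t, vis0)).1 := by
  rw [get_tiles_be_removed, cellsB, List.foldl_flatMap]
  simp only [List.foldl_map]
  rfl

theorem outInv_init (g0 : List (List Int)) : OutInv g0 (g0, vis0) ∅ := by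
  refine ⟨shape_vis0, VisSet_vis0, ?_, Finset.empty_subset _, rfl, ?_⟩
  · intro a ha
    exact absurd ha (Finset.notMem_empty a)
  · intro i j
    rw [if_neg (fun hcon => Finset.notMem_empty _ hcon.1)]

theorem A_char (t : List (List Int)) :
    (get_tiles_be_removed t).length = t.length ∧
    ∀ i j : Nat, entry? (get_tiles_be_removed t) i j =
      if ((i : Int), (j : Int)) ∈ cellsB ∧ 3 ≤ (KF t ((i : Int), (j : Int))).card
      then map0 (entry? t i j) else entry? t i j := by
  obtain ⟨V', hInv, _, hall⟩ := outer_fold_spec t cellsB (t, vis0) ∅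
    (fun q hq => (mem_cellsB q).1 hq) (outInv_init t)
  obtain ⟨hSh, hVis, hCl, hVc, hLen, hEnt⟩ := hInv
  have hVeq : ∀ q : Int × Int, q ∈ V' ↔ q ∈ cellsB := fun q =>
    ⟨fun h => (mem_cellsB q).2 ((mem_cellsF q).1 (hVc h)), fun h => hall q h⟩
  rw [A_eq_fold]
  refine ⟨hLen, ?_⟩
  intro i j
  rw [hEnt i j]
  exact if_congr (and_congr_left' (hVeq _)) rfl rfl

theorem grid_ext (g1 g2 : List (List Int)) (hlen : g1.length = g2.length)
    (h : ∀ i j : Nat, entry? g1 i j = entry? g2 i j) : g1 = g2 := by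
  apply List.ext_getElem?
  intro i
  by_cases hi : i < g1.length
  · have hi2 : i < g2.length := hlen ▸ hi
    rw [List.getElem?_eq_getElem hi, List.getElem?_eq_getElem hi2]
    have hrow : g1[i] = g2[i] := by
      apply List.ext_getElem?
      intro j
      have hj := h i j
      rw [entry?, entry?, List.getElem?_eq_getElem hi, List.getElem?_eq_getElem hi2] at hj
      simpa using hj
    rw [hrow]
  · rw [List.getElem?_eq_none (by omega), List.getElem?_eq_none (by omega)]

-- ===== B-side: union-find correctness =====

def InRg (x : Int) : Prop := 0 ≤ x ∧ x < 25

def rg25 : List Int := PySem.List.pyRange 0 25 1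

def RootP (par : List Int) (x : Int) : Prop := pget par x = x

def nrCount (par : List Int) : Nat := rg25.countP (fun i => !(pget par i == i))

def InvU (par : List Int) : Prop :=
  par.length = 25 ∧ (∀ i, InRg i → InRg (pget par i)) ∧ nrCount par ≤ 24 ∧
  ∀ i, InRg i → ∃ m ≤ nrCount par, RootP par ((pget par)^[m] i)

theorem mem_rg25 (i : Int) : i ∈ rg25 ↔ InRg i := by
  rw [rg25, PySem.List.mem_pyRange_one]; rfl

theorem nodup_rg25 : rg25.Nodup := by decide

theorem len_rg25 : rg25.length = 25 := by decide

theorem iterate_root (par : List Int) (x : Int) (h : RootP par x) :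
    ∀ n, (pget par)^[n] x = x := by
  intro n
  induction n with
  | zero => rfl
  | succ n ih => rw [Function.iterate_succ_apply, h, ih]

theorem findFuel_eq_iterate (par : List Int) :
    ∀ (fuel : Nat) (i : Int) (m : Nat), m < fuel → RootP par ((pget par)^[m] i) →
      findFuel fuel par i = (pget par)^[m] i := by
  intro fuel
  induction fuel with
  | zero => intro i m hm; omega
  | succ n ih =>
      intro i m hm hr
      rw [findFuel]
      by_cases hroot : pget par i = i
      · rw [if_pos hroot]
        rw [iterate_root par i hroot m] at hr ⊢
      · rw [if_neg hroot]
        cases m with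
        | zero => exact absurd hr hroot
        | succ m =>
            rw [Function.iterate_succ_apply] at hr ⊢
            exact ih (pget par i) m (by omega) hr

theorem root_unique (par : List Int) (i : Int) (m1 m2 : Nat)
    (h1 : RootP par ((pget par)^[m1] i)) (h2 : RootP par ((pget par)^[m2] i)) :
    (pget par)^[m1] i = (pget par)^[m2] i := by
  rcases le_total m1 m2 with h | h
  · conv_rhs => rw [show m2 = (m2 - m1) + m1 by omega, Function.iterate_add_apply]
    rw [iterate_root par _ h1]
  · conv_lhs => rw [show m1 = (m1 - m2) + m2 by omega, Function.iterate_add_apply]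
    rw [iterate_root par _ h2]

theorem find_spec (par : List Int) (hInv : InvU par) (i : Int) (hi : InRg i) :
    ∃ m ≤ 24, (pget par)^[m] i = findU par i ∧ RootP par (findU par i) := by
  obtain ⟨m, hm, hr⟩ := hInv.2.2.2 i hi
  have hm24 : m ≤ 24 := le_trans hm hInv.2.2.1
  have := findFuel_eq_iterate par 25 i m (by omega) hr
  exact ⟨m, hm24, this.symm, by rw [findU, this]; exact hr⟩

theorem findU_eq (par : List Int) (hInv : InvU par) (i : Int) (hi : InRg i)
    (m : Nat) (r : Int) (hm : (pget par)^[m] i = r) (hr : RootP par r) :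
    findU par i = r := by
  obtain ⟨m0, _, hiter, hroot⟩ := find_spec par hInv i hi
  rw [← hiter, ← hm]
  exact root_unique par i m0 m (hiter ▸ hroot) (hm ▸ hr)

theorem iter_inrg (par : List Int) (h2 : ∀ i, InRg i → InRg (pget par i)) (i : Int)
    (hi : InRg i) : ∀ n, InRg ((pget par)^[n] i) := by
  intro n
  induction n with
  | zero => exact hi
  | succ n ih => rw [Function.iterate_succ_apply']; exact h2 _ ih

theorem find_inrg (par : List Int) (hInv : InvU par) (i : Int) (hi : InRg i) :
    InRg (findU par i) := by
  obtain ⟨m, _, hiter, _⟩ := find_spec par hInv i hi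
  rw [← hiter]
  exact iter_inrg par hInv.2.1 i hi m

theorem find_root (par : List Int) (hInv : InvU par) (i : Int) (hi : InRg i) :
    RootP par (findU par i) := by
  obtain ⟨m, _, _, h⟩ := find_spec par hInv i hi
  exact h

theorem root_find_self (par : List Int) (r : Int) (hr : RootP par r) : findU par r = r := by
  exact findFuel_eq_iterate par 25 r 0 (by omega) hr

theorem pget_set (par : List Int) (hlen : par.length = 25) (a v : Int) (ha : InRg a)
    (i : Int) (hi : InRg i) :
    pget (par.set a.toNat v) i = if i = a then v else pget par i := by
  obtain ⟨ha1, ha2⟩ := ha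
  obtain ⟨hi1, hi2⟩ := hi
  unfold pget
  rw [List.getD_eq_getElem?_getD, List.getD_eq_getElem?_getD, List.getElem?_set]
  by_cases h : i = a
  · subst h
    rw [if_pos rfl, if_pos (by omega), if_pos rfl]
    rfl
  · have hne : ¬ a.toNat = i.toNat := by omega
    rw [if_neg hne, if_neg h]

theorem countP_change (p q : Int → Bool) :
    ∀ (l : List Int), l.Nodup → ∀ a ∈ l, p a = false → q a = true →
    (∀ x ∈ l, x ≠ a → q x = p x) → l.countP q = l.countP p + 1 := by
  intro l
  induction l with
  | nil => intro _ a ha; cases ha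
  | cons x l ih =>
      intro hnd a ha hpa hqa hoth
      rw [List.countP_cons, List.countP_cons]
      rcases List.mem_cons.1 ha with rfl | hal
      · have : ∀ x ∈ l, q x = p x := by
          intro x hx
          exact hoth x (List.mem_cons_of_mem _ hx) (fun h => (List.nodup_cons.1 hnd).1 (h ▸ hx))
        have heq : l.countP q = l.countP p := List.countP_congr (fun x hx => by rw [this x hx])
        rw [heq, hpa, hqa]
        simp
      · have hxa : x ≠ a := fun h => (List.nodup_cons.1 hnd).1 (h ▸ hal)
        rw [ih (List.nodup_cons.1 hnd).2 a hal hpa hqa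
          (fun y hy hya => hoth y (List.mem_cons_of_mem _ hy) hya),
          hoth x List.mem_cons_self hxa]
        split <;> omega

theorem countP_lt (p : Int → Bool) :
    ∀ (l : List Int) (b : Int), b ∈ l → p b = false → l.countP p < l.length := by
  intro l
  induction l with
  | nil => intro b hb; cases hb
  | cons x l ih =>
      intro b hb hpb
      rw [List.countP_cons, List.length_cons]
      have hle := List.countP_le_length (l := l) (p := p)
      rcases List.mem_cons.1 hb with rfl | hbl
      · rw [hpb]
        simp
        omega
      · have := ih b hbl hpb
        by_cases hx : p x = true
        · rw [if_pos hx]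
          omega
        · rw [if_neg hx]
          omega

-- the union block: par' = par.set a.toNat b for distinct roots a b
theorem u_pget (par : List Int) (hInv : InvU par) (a b : Int) (ha : InRg a) (i : Int)
    (hi : InRg i) : pget (par.set a.toNat b) i = if i = a then b else pget par i :=
  pget_set par hInv.1 a b ha i hi

theorem u_root (par : List Int) (hInv : InvU par) (a b : Int) (ha : InRg a) (_hb : InRg b)
    (hab : a ≠ b) (i : Int) (hi : InRg i) :
    RootP (par.set a.toNat b) i ↔ (i ≠ a ∧ RootP par i) := by
  unfold RootP
  rw [u_pget par hInv a b ha i hi]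
  by_cases h : i = a
  · subst h
    simp only [if_true]
    constructor
    · intro h; exact absurd h.symm hab
    · rintro ⟨h, _⟩; exact absurd rfl h
  · simp [h]

theorem u_nr (par : List Int) (hInv : InvU par) (a b : Int) (ha : InRg a) (_hb : InRg b)
    (hab : a ≠ b) (hra : RootP par a) :
    nrCount (par.set a.toNat b) = nrCount par + 1 := by
  unfold nrCount
  refine countP_change _ _ rg25 nodup_rg25 a ((mem_rg25 a).2 ha) ?_ ?_ ?_
  · simp [show pget par a = a from hra]
  · rw [u_pget par hInv a b ha a ha, if_pos rfl]
    simpa using (Ne.symm hab)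
  · intro x hx hxa
    rw [u_pget par hInv a b ha x ((mem_rg25 x).1 hx), if_neg hxa]

theorem u_nr24 (par : List Int) (hInv : InvU par) (a b : Int) (ha : InRg a) (hb : InRg b)
    (hab : a ≠ b) (hrb : RootP par b) : nrCount (par.set a.toNat b) ≤ 24 := by
  have hroot' : pget (par.set a.toNat b) b = b := by
    rw [u_pget par hInv a b ha b hb, if_neg (Ne.symm hab)]
    exact hrb
  have := countP_lt (fun i => !(pget (par.set a.toNat b) i == i)) rg25 b
    ((mem_rg25 b).2 hb) (by simp [hroot'])
  rw [len_rg25] at this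
  unfold nrCount
  omega

theorem u_chain (par : List Int) (hInv : InvU par) (a b : Int) (ha : InRg a) (hb : InRg b)
    (hab : a ≠ b) (_hra : RootP par a) (hrb : RootP par b) :
    ∀ (m : Nat) (i : Int), InRg i → RootP par ((pget par)^[m] i) →
    ∃ m' ≤ m + 1, RootP (par.set a.toNat b) ((pget (par.set a.toNat b))^[m'] i) := by
  have hrootb : RootP (par.set a.toNat b) b :=
    (u_root par hInv a b ha hb hab b hb).2 ⟨Ne.symm hab, hrb⟩
  intro m
  induction m with
  | zero =>
      intro i hi hr
      by_cases hia : i = a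
      · refine ⟨1, by omega, ?_⟩
        rw [hia, Function.iterate_one, u_pget par hInv a b ha a ha, if_pos rfl]
        exact hrootb
      · exact ⟨0, by omega, (u_root par hInv a b ha hb hab i hi).2 ⟨hia, hr⟩⟩
  | succ m ih =>
      intro i hi hr
      by_cases hia : i = a
      · refine ⟨1, by omega, ?_⟩
        rw [hia, Function.iterate_one, u_pget par hInv a b ha a ha, if_pos rfl]
        exact hrootb
      · have hstep : pget (par.set a.toNat b) i = pget par i := by
          rw [u_pget par hInv a b ha i hi, if_neg hia]
        rw [Function.iterate_succ_apply] at hr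
        obtain ⟨m', hm', hr'⟩ := ih (pget par i) (hInv.2.1 i hi) hr
        refine ⟨m' + 1, by omega, ?_⟩
        rw [Function.iterate_succ_apply, hstep]
        exact hr'

theorem u_inv (par : List Int) (hInv : InvU par) (a b : Int) (ha : InRg a) (hb : InRg b)
    (hab : a ≠ b) (hra : RootP par a) (hrb : RootP par b) :
    InvU (par.set a.toNat b) := by
  refine ⟨by rw [List.length_set]; exact hInv.1, ?_, u_nr24 par hInv a b ha hb hab hrb, ?_⟩
  · intro i hi
    rw [u_pget par hInv a b ha i hi]
    by_cases h : i = a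
    · rw [if_pos h]; exact hb
    · rw [if_neg h]; exact hInv.2.1 i hi
  · intro i hi
    obtain ⟨m, hm, hr⟩ := hInv.2.2.2 i hi
    obtain ⟨m', hm', hr'⟩ := u_chain par hInv a b ha hb hab hra hrb m i hi hr
    refine ⟨m', ?_, hr'⟩
    rw [u_nr par hInv a b ha hb hab hra]
    omega

theorem u_reach_b (par : List Int) (hInv : InvU par) (a b : Int) (ha : InRg a) (_hb : InRg b)
    (_hab : a ≠ b) :
    ∀ (m : Nat) (i : Int), InRg i → (pget par)^[m] i = a →
    ∃ m', (pget (par.set a.toNat b))^[m'] i = b := by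
  intro m
  induction m with
  | zero =>
      intro i hi hit
      refine ⟨1, ?_⟩
      rw [show i = a from hit, Function.iterate_one, u_pget par hInv a b ha a ha, if_pos rfl]
  | succ m ih =>
      intro i hi hit
      by_cases hia : i = a
      · refine ⟨1, ?_⟩
        rw [hia, Function.iterate_one, u_pget par hInv a b ha a ha, if_pos rfl]
      · rw [Function.iterate_succ_apply] at hit
        obtain ⟨m', hm'⟩ := ih (pget par i) (hInv.2.1 i hi) hit
        refine ⟨m' + 1, ?_⟩
        rw [Function.iterate_succ_apply, u_pget par hInv a b ha i hi, if_neg hia]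
        exact hm'

theorem u_keep (par : List Int) (hInv : InvU par) (a b : Int) (ha : InRg a) (hra : RootP par a) :
    ∀ (m : Nat) (i r : Int), InRg i → RootP par r → r ≠ a → (pget par)^[m] i = r →
    (pget (par.set a.toNat b))^[m] i = r := by
  intro m
  induction m with
  | zero => intro i r _ _ _ h; exact h
  | succ m ih =>
      intro i r hi hr hrna hit
      have hia : i ≠ a := by
        intro h
        subst h
        rw [iterate_root par i hra (m+1)] at hit
        exact hrna hit.symm
      rw [Function.iterate_succ_apply] at hit
      rw [Function.iterate_succ_apply, u_pget par hInv a b ha i hi, if_neg hia]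
      exact ih (pget par i) r (hInv.2.1 i hi) hr hrna hit

theorem u_find (par : List Int) (hInv : InvU par) (a b : Int) (ha : InRg a) (hb : InRg b)
    (hab : a ≠ b) (hra : RootP par a) (hrb : RootP par b) (i : Int) (hi : InRg i) :
    findU (par.set a.toNat b) i = if findU par i = a then b else findU par i := by
  have hInv' : InvU (par.set a.toNat b) := u_inv par hInv a b ha hb hab hra hrb
  obtain ⟨m, hm, hiter, hroot⟩ := find_spec par hInv i hi
  by_cases h : findU par i = a
  · rw [if_pos h]
    obtain ⟨m', hm'⟩ := u_reach_b par hInv a b ha hb hab m i hi (by rw [hiter, h])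
    exact findU_eq _ hInv' i hi m' b hm'
      ((u_root par hInv a b ha hb hab b hb).2 ⟨Ne.symm hab, hrb⟩)
  · rw [if_neg h]
    have hkeep := u_keep par hInv a b ha hra m i (findU par i) hi hroot h hiter
    exact findU_eq _ hInv' i hi m (findU par i) hkeep
      ((u_root par hInv a b ha hb hab (findU par i) (find_inrg par hInv i hi)).2 ⟨h, hroot⟩)

-- unionU level
theorem uu_inv (par : List Int) (hInv : InvU par) (x y : Int) (hx : InRg x) (hy : InRg y) :
    InvU (unionU par x y) := by
  unfold unionU
  by_cases h : findU par x = findU par y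
  · rw [if_neg (not_ne_iff.2 h)]
    exact hInv
  · rw [if_pos h]
    exact u_inv par hInv _ _ (find_inrg par hInv x hx) (find_inrg par hInv y hy) h
      (find_root par hInv x hx) (find_root par hInv y hy)

theorem uu_find (par : List Int) (hInv : InvU par) (x y : Int) (hx : InRg x) (hy : InRg y)
    (i : Int) (hi : InRg i) :
    findU (unionU par x y) i = if findU par i = findU par x then findU par y else findU par i := by
  unfold unionU
  by_cases h : findU par x = findU par y
  · rw [if_neg (not_ne_iff.2 h)]
    split_ifs with h2
    · rw [h2, h]
    · rfl
  · rw [if_pos h]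
    rw [u_find par hInv _ _ (find_inrg par hInv x hx) (find_inrg par hInv y hy) h
      (find_root par hInv x hx) (find_root par hInv y hy) i hi]

theorem uu_connect (par : List Int) (hInv : InvU par) (x y : Int) (hx : InRg x) (hy : InRg y) :
    findU (unionU par x y) x = findU (unionU par x y) y := by
  rw [uu_find par hInv x y hx hy x hx, uu_find par hInv x y hx hy y hy]
  simp

theorem uu_mono (par : List Int) (hInv : InvU par) (x y : Int) (hx : InRg x) (hy : InRg y)
    (i j : Int) (hi : InRg i) (hj : InRg j) (h : findU par i = findU par j) :
    findU (unionU par x y) i = findU (unionU par x y) j := by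
  rw [uu_find par hInv x y hx hy i hi, uu_find par hInv x y hx hy j hj, h]

-- cells as indices
def cellOf (i : Int) : Int × Int := (PySem.Int.floordiv i 5, PySem.Int.mod i 5)

theorem cellOf_eq (i : Int) : cellOf i = (i / 5, i % 5) := by
  rw [cellOf, PySem.Int.floordiv_eq_ediv_of_pos (by omega), PySem.Int.mod_eq_emod_of_pos (by omega)]

theorem inb_cellOf (i : Int) (hi : InRg i) : inb (cellOf i) := by
  rw [cellOf_eq]
  obtain ⟨h1, h2⟩ := hi
  exact ⟨by omega, by omega, by omega, by omega⟩

theorem cellOf_idx (r c : Int) (_hr : 0 ≤ r ∧ r < 5) (hc : 0 ≤ c ∧ c < 5) :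
    cellOf (r * 5 + c) = (r, c) := by
  rw [cellOf_eq, Prod.ext_iff]
  constructor <;> simp only <;> omega

theorem idx_cellOf (i : Int) (_hi : InRg i) : (cellOf i).1 * 5 + (cellOf i).2 = i := by
  rw [cellOf_eq]
  simp only
  omega

-- the semantic invariant: each node lies in the same-value component of its root
def SemInv (t : List (List Int)) (par : List Int) : Prop :=
  ∀ i, InRg i → cellOf (findU par i) ∈ KF t (cellOf i)

theorem uu_sem (t : List (List Int)) (par : List Int) (hInv : InvU par)
    (hsem : SemInv t par) (x y : Int) (hx : InRg x) (hy : InRg y)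
    (hedge : stepg t (cellOf x) (cellOf y)) : SemInv t (unionU par x y) := by
  intro i hi
  rw [uu_find par hInv x y hx hy i hi]
  split_ifs with h
  · have hix := hsem x hx
    have hiy := hsem y hy
    have hii := hsem i hi
    have hKx : KF t (cellOf (findU par x)) = KF t (cellOf x) :=
      KF_eq_of_mem t (cellOf x) _ (inb_cellOf x hx) hix
    have hKy : KF t (cellOf (findU par y)) = KF t (cellOf y) :=
      KF_eq_of_mem t (cellOf y) _ (inb_cellOf y hy) hiy
    have hKi : KF t (cellOf (findU par i)) = KF t (cellOf i) :=
      KF_eq_of_mem t (cellOf i) _ (inb_cellOf i hi) hii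
    have hyx : cellOf y ∈ KF t (cellOf x) :=
      KF_closed t (cellOf x) (inb_cellOf x hx) (cellOf x) (mem_KF_self t _) (cellOf y) hedge
    have hKyx : KF t (cellOf y) = KF t (cellOf x) :=
      KF_eq_of_mem t (cellOf x) _ (inb_cellOf x hx) hyx
    have : cellOf (findU par y) ∈ KF t (cellOf i) := by
      rw [← hKi, h, hKx, ← hKyx]
      exact hiy
    exact this
  · exact hsem i hi

-- unionCell level
theorem uc_inrg (r c : Int) (hr : 0 ≤ r ∧ r < 5) (hc : 0 ≤ c ∧ c < 5) :
    InRg (r * 5 + c) := by unfold InRg; omega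

-- case equations for unionCell
theorem unionCell_tt (t : List (List Int)) (par : List Int) (r c : Int)
    (h1 : c < 4 ∧ get2 t r c = get2 t r (c + 1))
    (h2 : r < 4 ∧ get2 t r c = get2 t (r + 1) c) :
    unionCell t par r c =
      unionU (unionU par (r * 5 + c) (r * 5 + c + 1)) (r * 5 + c) (r * 5 + c + 5) := by
  unfold unionCell
  simp only [if_pos h1, if_pos h2]

theorem unionCell_tf (t : List (List Int)) (par : List Int) (r c : Int)
    (h1 : c < 4 ∧ get2 t r c = get2 t r (c + 1))
    (h2 : ¬(r < 4 ∧ get2 t r c = get2 t (r + 1) c)) :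
    unionCell t par r c = unionU par (r * 5 + c) (r * 5 + c + 1) := by
  unfold unionCell
  simp only [if_pos h1, if_neg h2]

theorem unionCell_ft (t : List (List Int)) (par : List Int) (r c : Int)
    (h1 : ¬(c < 4 ∧ get2 t r c = get2 t r (c + 1)))
    (h2 : r < 4 ∧ get2 t r c = get2 t (r + 1) c) :
    unionCell t par r c = unionU par (r * 5 + c) (r * 5 + c + 5) := by
  unfold unionCell
  simp only [if_neg h1, if_pos h2]

theorem unionCell_ff (t : List (List Int)) (par : List Int) (r c : Int)
    (h1 : ¬(c < 4 ∧ get2 t r c = get2 t r (c + 1)))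
    (h2 : ¬(r < 4 ∧ get2 t r c = get2 t (r + 1) c)) :
    unionCell t par r c = par := by
  unfold unionCell
  simp only [if_neg h1, if_neg h2]

theorem uc_inv (t : List (List Int)) (par : List Int) (hInv : InvU par) (r c : Int)
    (hr : 0 ≤ r ∧ r < 5) (hc : 0 ≤ c ∧ c < 5) : InvU (unionCell t par r c) := by
  have hrc := uc_inrg r c hr hc
  by_cases h1 : c < 4 ∧ get2 t r c = get2 t r (c + 1) <;>
    by_cases h2 : r < 4 ∧ get2 t r c = get2 t (r + 1) c
  · have h1a := h1.1
    have h2a := h2.1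
    have hrc1 : InRg (r * 5 + c + 1) := by unfold InRg; omega
    have hrc5 : InRg (r * 5 + c + 5) := by unfold InRg; omega
    rw [unionCell_tt t par r c h1 h2]
    exact uu_inv _ (uu_inv par hInv _ _ hrc hrc1) _ _ hrc hrc5
  · have h1a := h1.1
    have hrc1 : InRg (r * 5 + c + 1) := by unfold InRg; omega
    rw [unionCell_tf t par r c h1 h2]
    exact uu_inv par hInv _ _ hrc hrc1
  · have h2a := h2.1
    have hrc5 : InRg (r * 5 + c + 5) := by unfold InRg; omega
    rw [unionCell_ft t par r c h1 h2]
    exact uu_inv par hInv _ _ hrc hrc5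
  · rw [unionCell_ff t par r c h1 h2]
    exact hInv

theorem uc_sem (t : List (List Int)) (par : List Int) (hInv : InvU par)
    (hsem : SemInv t par) (r c : Int) (hr : 0 ≤ r ∧ r < 5) (hc : 0 ≤ c ∧ c < 5) :
    SemInv t (unionCell t par r c) := by
  unfold unionCell
  have hi := uc_inrg r c hr hc
  have hedgeR : c < 4 → get2 t r c = get2 t r (c + 1) →
      stepg t (cellOf (r * 5 + c)) (cellOf (r * 5 + c + 1)) := by
    intro h4 hv
    rw [cellOf_idx r c hr hc, show r * 5 + c + 1 = r * 5 + (c + 1) by ring,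
      cellOf_idx r (c+1) hr ⟨by omega, by omega⟩]
    exact ⟨⟨hr.1, hr.2, hc.1, hc.2⟩, ⟨hr.1, hr.2, by omega, by omega⟩,
      by simp [nbrsB], hv⟩
  have hedgeD : r < 4 → get2 t r c = get2 t (r + 1) c →
      stepg t (cellOf (r * 5 + c)) (cellOf (r * 5 + c + 5)) := by
    intro h4 hv
    rw [cellOf_idx r c hr hc, show r * 5 + c + 5 = (r + 1) * 5 + c by ring,
      cellOf_idx (r+1) c ⟨by omega, by omega⟩ hc]
    exact ⟨⟨hr.1, hr.2, hc.1, hc.2⟩, ⟨by omega, by omega, hc.1, hc.2⟩,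
      by simp [nbrsB], hv⟩
  split_ifs with h1 h2
  · exact uu_sem t _ (uu_inv par hInv _ _ hi (by unfold InRg; omega))
      (uu_sem t par hInv hsem _ _ hi (by unfold InRg; omega) (hedgeR h1.1 h1.2))
      _ _ hi (by unfold InRg; omega) (hedgeD h2.1 h2.2)
  · exact uu_sem t par hInv hsem _ _ hi (by unfold InRg; omega) (hedgeR h1.1 h1.2)
  · rename_i h2
    exact uu_sem t par hInv hsem _ _ hi (by unfold InRg; omega) (hedgeD h2.1 h2.2)
  · exact hsem

theorem uc_mono (t : List (List Int)) (par : List Int) (hInv : InvU par) (r c : Int)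
    (hr : 0 ≤ r ∧ r < 5) (hc : 0 ≤ c ∧ c < 5) (i j : Int) (hi : InRg i) (hj : InRg j)
    (h : findU par i = findU par j) :
    findU (unionCell t par r c) i = findU (unionCell t par r c) j := by
  unfold unionCell
  have hrc := uc_inrg r c hr hc
  split_ifs with h1 h2
  · exact uu_mono _ (uu_inv par hInv _ _ hrc (by unfold InRg; omega)) _ _ hrc
      (by unfold InRg; omega) i j hi hj
      (uu_mono par hInv _ _ hrc (by unfold InRg; omega) i j hi hj h)
  · exact uu_mono par hInv _ _ hrc (by unfold InRg; omega) i j hi hj h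
  · exact uu_mono par hInv _ _ hrc (by unfold InRg; omega) i j hi hj h
  · exact h

theorem uc_edges (t : List (List Int)) (par : List Int) (hInv : InvU par) (r c : Int)
    (hr : 0 ≤ r ∧ r < 5) (hc : 0 ≤ c ∧ c < 5) :
    (c < 4 → get2 t r c = get2 t r (c + 1) →
      findU (unionCell t par r c) (r * 5 + c) = findU (unionCell t par r c) (r * 5 + c + 1)) ∧
    (r < 4 → get2 t r c = get2 t (r + 1) c →
      findU (unionCell t par r c) (r * 5 + c) = findU (unionCell t par r c) (r * 5 + c + 5)) := by
  have hrc := uc_inrg r c hr hc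
  constructor
  · intro h4 hv
    have hrc1 : InRg (r * 5 + c + 1) := by unfold InRg; omega
    have hcon := uu_connect par hInv (r * 5 + c) (r * 5 + c + 1) hrc hrc1
    have hInv1 := uu_inv par hInv (r * 5 + c) (r * 5 + c + 1) hrc hrc1
    by_cases h2 : r < 4 ∧ get2 t r c = get2 t (r + 1) c
    · have h2a := h2.1
      have hrc5 : InRg (r * 5 + c + 5) := by unfold InRg; omega
      rw [unionCell_tt t par r c ⟨h4, hv⟩ h2]
      exact uu_mono _ hInv1 _ _ hrc hrc5 _ _ hrc hrc1 hcon
    · rw [unionCell_tf t par r c ⟨h4, hv⟩ h2]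
      exact hcon
  · intro h4 hv
    have hrc5 : InRg (r * 5 + c + 5) := by unfold InRg; omega
    by_cases h1 : c < 4 ∧ get2 t r c = get2 t r (c + 1)
    · have h1a := h1.1
      have hrc1 : InRg (r * 5 + c + 1) := by unfold InRg; omega
      rw [unionCell_tt t par r c h1 ⟨h4, hv⟩]
      exact uu_connect _ (uu_inv par hInv _ _ hrc hrc1) _ _ hrc hrc5
    · rw [unionCell_ft t par r c h1 ⟨h4, hv⟩]
      exact uu_connect par hInv _ _ hrc hrc5

-- the fold over all cells
def parStep (t : List (List Int)) (par : List Int) (p : Int × Int) : List Int :=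
  unionCell t par p.1 p.2

def par0 : List Int := PySem.List.pyRange 0 25 1

def parFc (t : List (List Int)) : List Int := cellsB.foldl (parStep t) par0

theorem fold_inv (t : List (List Int)) :
    ∀ (l : List (Int × Int)) (par : List Int), (∀ p ∈ l, inb p) → InvU par →
    InvU (l.foldl (parStep t) par) := by
  intro l
  induction l with
  | nil => intro par _ h; exact h
  | cons x l ih =>
      intro par hmem hInv
      obtain ⟨h1, h2, h3, h4⟩ := hmem x List.mem_cons_self
      exact ih _ (fun p hp => hmem p (List.mem_cons_of_mem x hp))
        (uc_inv t par hInv x.1 x.2 ⟨h1, h2⟩ ⟨h3, h4⟩)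

theorem fold_sem (t : List (List Int)) :
    ∀ (l : List (Int × Int)) (par : List Int), (∀ p ∈ l, inb p) → InvU par → SemInv t par →
    SemInv t (l.foldl (parStep t) par) := by
  intro l
  induction l with
  | nil => intro par _ _ h; exact h
  | cons x l ih =>
      intro par hmem hInv hsem
      obtain ⟨h1, h2, h3, h4⟩ := hmem x List.mem_cons_self
      exact ih _ (fun p hp => hmem p (List.mem_cons_of_mem x hp))
        (uc_inv t par hInv x.1 x.2 ⟨h1, h2⟩ ⟨h3, h4⟩)
        (uc_sem t par hInv hsem x.1 x.2 ⟨h1, h2⟩ ⟨h3, h4⟩)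

theorem fold_mono (t : List (List Int)) :
    ∀ (l : List (Int × Int)) (par : List Int), (∀ p ∈ l, inb p) → InvU par →
    ∀ i j, InRg i → InRg j → findU par i = findU par j →
    findU (l.foldl (parStep t) par) i = findU (l.foldl (parStep t) par) j := by
  intro l
  induction l with
  | nil => intro par _ _ i j _ _ h; exact h
  | cons x l ih =>
      intro par hmem hInv i j hi hj h
      obtain ⟨h1, h2, h3, h4⟩ := hmem x List.mem_cons_self
      exact ih _ (fun p hp => hmem p (List.mem_cons_of_mem x hp))
        (uc_inv t par hInv x.1 x.2 ⟨h1, h2⟩ ⟨h3, h4⟩) i j hi hj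
        (uc_mono t par hInv x.1 x.2 ⟨h1, h2⟩ ⟨h3, h4⟩ i j hi hj h)

theorem fold_edges (t : List (List Int)) :
    ∀ (l : List (Int × Int)) (par : List Int), (∀ p ∈ l, inb p) → InvU par →
    ∀ p ∈ l,
    (p.2 < 4 → get2 t p.1 p.2 = get2 t p.1 (p.2 + 1) →
      findU (l.foldl (parStep t) par) (p.1 * 5 + p.2) =
        findU (l.foldl (parStep t) par) (p.1 * 5 + p.2 + 1)) ∧
    (p.1 < 4 → get2 t p.1 p.2 = get2 t (p.1 + 1) p.2 →
      findU (l.foldl (parStep t) par) (p.1 * 5 + p.2) =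
        findU (l.foldl (parStep t) par) (p.1 * 5 + p.2 + 5)) := by
  intro l
  induction l with
  | nil => intro par _ _ p hp; cases hp
  | cons x l ih =>
      intro par hmem hInv p hp
      obtain ⟨h1, h2, h3, h4⟩ := hmem x List.mem_cons_self
      have hInv1 := uc_inv t par hInv x.1 x.2 ⟨h1, h2⟩ ⟨h3, h4⟩
      have hmem' : ∀ q ∈ l, inb q := fun q hq => hmem q (List.mem_cons_of_mem x hq)
      rcases List.mem_cons.1 hp with rfl | hpl
      · obtain ⟨eR, eD⟩ := uc_edges t par hInv p.1 p.2 ⟨h1, h2⟩ ⟨h3, h4⟩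
        constructor
        · intro hlt hv
          exact fold_mono t l _ hmem' hInv1 _ _ (by unfold InRg; omega)
            (by unfold InRg; omega) (eR hlt hv)
        · intro hlt hv
          exact fold_mono t l _ hmem' hInv1 _ _ (by unfold InRg; omega)
            (by unfold InRg; omega) (eD hlt hv)
      · exact ih _ hmem' hInv1 p hpl

theorem pget_par0 (i : Int) (hi : InRg i) : pget par0 i = i := by
  obtain ⟨h1, h2⟩ := hi
  have hrange : par0 = [0,1,2,3,4,5,6,7,8,9,10,11,12,13,14,15,16,17,18,19,20,21,22,23,24] := by
    decide
  rw [hrange]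
  interval_cases i <;> decide

theorem inv_par0 : InvU par0 := by
  refine ⟨by decide, ?_, ?_, ?_⟩
  · intro i hi; rw [pget_par0 i hi]; exact hi
  · decide
  · intro i hi
    exact ⟨0, by omega, pget_par0 i hi⟩

theorem find_par0 (i : Int) (hi : InRg i) : findU par0 i = i :=
  root_find_self par0 i (pget_par0 i hi)

theorem sem_par0 (t : List (List Int)) : SemInv t par0 := by
  intro i hi
  rw [find_par0 i hi]
  exact mem_KF_self t (cellOf i)

theorem parFc_inv (t : List (List Int)) : InvU (parFc t) :=
  fold_inv t cellsB par0 (fun p hp => (mem_cellsB p).1 hp) inv_par0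

theorem parFc_sem (t : List (List Int)) : SemInv t (parFc t) :=
  fold_sem t cellsB par0 (fun p hp => (mem_cellsB p).1 hp) inv_par0 (sem_par0 t)

-- every same-value adjacency is merged in the final parent structure
theorem edge_find (t : List (List Int)) (p q : Int × Int) (hstep : stepg t p q) :
    findU (parFc t) (p.1 * 5 + p.2) = findU (parFc t) (q.1 * 5 + q.2) := by
  obtain ⟨hp, hq, hnb, hv⟩ := hstep
  have hmem : ∀ x ∈ cellsB, inb x := fun x hx => (mem_cellsB x).1 hx
  have hEd := fold_edges t cellsB par0 hmem inv_par0
  simp only [nbrsB, List.mem_cons, List.not_mem_nil, or_false] at hnb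
  obtain ⟨hp1, hp2, hp3, hp4⟩ := hp
  rcases hnb with rfl | rfl | rfl | rfl
  · -- q = (p.1 - 1, p.2): the down edge of q
    have hq' : 0 ≤ p.1 - 1 ∧ p.1 - 1 < 5 ∧ 0 ≤ p.2 ∧ p.2 < 5 := hq
    have hEq' : findU (parFc t) ((p.1 - 1) * 5 + p.2) =
        findU (parFc t) ((p.1 - 1) * 5 + p.2 + 5) :=
      (hEd (p.1 - 1, p.2) ((mem_cellsB _).2 hq)).2
        (by show p.1 - 1 < 4; omega)
        (by show get2 t (p.1 - 1) p.2 = get2 t (p.1 - 1 + 1) p.2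
            rw [show p.1 - 1 + 1 = p.1 by ring]
            exact hv.symm)
    rw [show (p.1 - 1) * 5 + p.2 + 5 = p.1 * 5 + p.2 by ring] at hEq'
    exact hEq'.symm
  · -- q = (p.1 + 1, p.2): the down edge of p
    have hEq' : findU (parFc t) (p.1 * 5 + p.2) =
        findU (parFc t) (p.1 * 5 + p.2 + 5) :=
      (hEd p ((mem_cellsB _).2 ⟨hp1, hp2, hp3, hp4⟩)).2
        (by
          have hq' : 0 ≤ p.1 + 1 ∧ p.1 + 1 < 5 ∧ 0 ≤ p.2 ∧ p.2 < 5 := hq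
          omega)
        hv
    rw [show p.1 * 5 + p.2 + 5 = (p.1 + 1) * 5 + p.2 by ring] at hEq'
    exact hEq'
  · -- q = (p.1, p.2 - 1): the right edge of q
    have hq' : 0 ≤ p.1 ∧ p.1 < 5 ∧ 0 ≤ p.2 - 1 ∧ p.2 - 1 < 5 := hq
    have hEq' : findU (parFc t) (p.1 * 5 + (p.2 - 1)) =
        findU (parFc t) (p.1 * 5 + (p.2 - 1) + 1) :=
      (hEd (p.1, p.2 - 1) ((mem_cellsB _).2 hq)).1
        (by show p.2 - 1 < 4; omega)
        (by show get2 t p.1 (p.2 - 1) = get2 t p.1 (p.2 - 1 + 1)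
            rw [show p.2 - 1 + 1 = p.2 by ring]
            exact hv.symm)
    rw [show p.1 * 5 + (p.2 - 1) + 1 = p.1 * 5 + p.2 by ring] at hEq'
    exact hEq'.symm
  · -- q = (p.1, p.2 + 1): the right edge of p
    have hEq' : findU (parFc t) (p.1 * 5 + p.2) =
        findU (parFc t) (p.1 * 5 + p.2 + 1) :=
      (hEd p ((mem_cellsB _).2 ⟨hp1, hp2, hp3, hp4⟩)).1
        (by
          have hq' : 0 ≤ p.1 ∧ p.1 < 5 ∧ 0 ≤ p.2 + 1 ∧ p.2 + 1 < 5 := hq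
          omega)
        hv
    rw [show p.1 * 5 + p.2 + 1 = p.1 * 5 + (p.2 + 1) by ring] at hEq'
    exact hEq'

-- the main characterization: equal roots = same same-value component
theorem find_iff_KF (t : List (List Int)) (i j : Int) (hi : InRg i) (hj : InRg j) :
    findU (parFc t) i = findU (parFc t) j ↔ cellOf j ∈ KF t (cellOf i) := by
  have hInv := parFc_inv t
  have hsem := parFc_sem t
  constructor
  · intro h
    have hii := hsem i hi
    have hjj := hsem j hj
    have hKi : KF t (cellOf (findU (parFc t) i)) = KF t (cellOf i) :=
      KF_eq_of_mem t (cellOf i) _ (inb_cellOf i hi) hii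
    have hKj : KF t (cellOf (findU (parFc t) j)) = KF t (cellOf j) :=
      KF_eq_of_mem t (cellOf j) _ (inb_cellOf j hj) hjj
    have : KF t (cellOf i) = KF t (cellOf j) := by rw [← hKi, h, hKj]
    rw [this]
    exact mem_KF_self t (cellOf j)
  · intro h
    letI : DecidablePred (fun q : Int × Int =>
        findU (parFc t) (q.1 * 5 + q.2) = findU (parFc t) i) := fun q => inferInstance
    set T : Finset (Int × Int) :=
      cellsF.filter (fun q => findU (parFc t) (q.1 * 5 + q.2) = findU (parFc t) i) with hT
    have hiT : cellOf i ∈ T := by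
      rw [hT, Finset.mem_filter, mem_cellsF]
      exact ⟨inb_cellOf i hi, by rw [idx_cellOf i hi]⟩
    have hclosed : ClosedF t T := by
      intro a ha b hb
      rw [hT, Finset.mem_filter, mem_cellsF] at ha ⊢
      exact ⟨hb.2.1, by rw [← edge_find t a b hb]; exact ha.2⟩
    have hsub := KF_least t (cellOf i) T hiT hclosed
    have hjT := hsub h
    rw [hT, Finset.mem_filter] at hjT
    have := hjT.2
    rw [idx_cellOf j hj] at this
    exact this.symm

-- group size = component size
def grpL (t : List (List Int)) (k : Int) : List Int :=
  rg25.filter (fun x => findU (parFc t) x == k)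

theorem mem_grpL (t : List (List Int)) (k x : Int) :
    x ∈ grpL t k ↔ InRg x ∧ findU (parFc t) x = k := by
  rw [grpL, List.mem_filter, mem_rg25, beq_iff_eq]

theorem grpL_card (t : List (List Int)) (i : Int) (hi : InRg i) :
    (grpL t (findU (parFc t) i)).length = (KF t (cellOf i)).card := by
  have hnd : (grpL t (findU (parFc t) i)).Nodup := List.Nodup.filter _ nodup_rg25
  rw [← List.toFinset_card_of_nodup hnd]
  apply Finset.card_bij' (fun a _ => cellOf a) (fun q _ => q.1 * 5 + q.2)
  · intro a ha
    rw [List.mem_toFinset, mem_grpL] at ha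
    exact (find_iff_KF t i a hi ha.1).1 ha.2.symm
  · intro q hq
    have hinq : inb q := by
      have := KF_subset_cells t (cellOf i) (inb_cellOf i hi) hq
      rwa [mem_cellsF] at this
    have hrg : InRg (q.1 * 5 + q.2) := by
      obtain ⟨a, b, c, d⟩ := hinq; unfold InRg; omega
    rw [List.mem_toFinset, mem_grpL]
    refine ⟨hrg, ?_⟩
    have hcell : cellOf (q.1 * 5 + q.2) = q := by
      obtain ⟨a, b, c, d⟩ := hinq
      exact cellOf_idx q.1 q.2 ⟨a, b⟩ ⟨c, d⟩
    exact ((find_iff_KF t i (q.1 * 5 + q.2) hi hrg).2 (by rw [hcell]; exact hq)).symm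
  · intro a ha
    rw [List.mem_toFinset, mem_grpL] at ha
    exact idx_cellOf a ha.1
  · intro q hq
    have hinq : inb q := by
      have := KF_subset_cells t (cellOf i) (inb_cellOf i hi) hq
      rwa [mem_cellsF] at this
    obtain ⟨a, b, c, d⟩ := hinq
    exact cellOf_idx q.1 q.2 ⟨a, b⟩ ⟨c, d⟩

-- ===== B-side: the grouping dict and the zero phase =====

def groupsD (t : List (List Int)) : PySem.Dict Int (List Int) :=
  rg25.foldl (fun d i => d.modify (findU (parFc t) i) [] (· ++ [i])) PySem.Dict.empty

theorem groupsD_eq_pairs (t : List (List Int)) :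
    groupsD t = ((rg25.map (fun i => (findU (parFc t) i, i))).foldl
      (fun d p => d.modify p.1 [] (· ++ [p.2])) PySem.Dict.empty) := by
  unfold groupsD
  rw [List.foldl_map]

theorem groupsD_getD (t : List (List Int)) (k : Int) :
    (groupsD t).getD k [] = grpL t k := by
  rw [groupsD_eq_pairs, PySem.Dict.getD_foldl_modify_append, PySem.Dict.getD_empty,
    List.filter_map, List.map_map, List.nil_append]
  show List.map (fun i => i) (rg25.filter (fun x => findU (parFc t) x == k)) = grpL t k
  rw [List.map_id']
  rfl

theorem groupsD_keys_nodup (t : List (List Int)) : (groupsD t).keys.Nodup := by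
  rw [groupsD_eq_pairs]
  exact PySem.Dict.nodup_keys_foldl_modify_key _ (fun p => (p : Int × Int).1) []
    (fun _ p g => g ++ [p.2]) PySem.Dict.empty (by simp [PySem.Dict.keys_empty])

theorem groupsD_keys (t : List (List Int)) :
    (groupsD t).keys = PySem.Set.ofList (rg25.map (fun i => findU (parFc t) i)) := by
  rw [groupsD_eq_pairs]
  have hk : ((rg25.map (fun i => (findU (parFc t) i, i))).foldl
      (fun d p => d.modify p.1 [] (· ++ [p.2])) PySem.Dict.empty).keys
      = PySem.Set.update (PySem.Dict.empty : PySem.Dict Int (List Int)).keys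
          ((rg25.map (fun i => (findU (parFc t) i, i))).map (fun p => p.1)) :=
    PySem.Dict.keys_foldl_modify_key _ _ _ _ _
  rw [hk, PySem.Dict.keys_empty, PySem.Set.update_nil_left, List.map_map]
  rfl

theorem groupsD_keys_mem (t : List (List Int)) (k : Int) :
    k ∈ (groupsD t).keys ↔ ∃ i, InRg i ∧ findU (parFc t) i = k := by
  rw [groupsD_keys, PySem.Set.mem_ofList, List.mem_map]
  constructor
  · rintro ⟨i, hmem, rfl⟩; exact ⟨i, (mem_rg25 i).1 hmem, rfl⟩
  · rintro ⟨i, hi, rfl⟩; exact ⟨i, (mem_rg25 i).2 hi, rfl⟩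

theorem groupsD_values (t : List (List Int)) :
    (groupsD t).values = (groupsD t).keys.map (fun k => grpL t k) := by
  rw [PySem.Dict.values_eq_map_keys (groupsD t) (groupsD_keys_nodup t) []]
  exact List.map_congr_left (fun k _ => groupsD_getD t k)

-- the zeroed index list
def bigZ (t : List (List Int)) : List Int :=
  ((groupsD t).values.filter (fun grp => 3 ≤ grp.length)).flatten

theorem mem_bigZ (t : List (List Int)) (x : Int) :
    x ∈ bigZ t ↔ InRg x ∧ 3 ≤ (grpL t (findU (parFc t) x)).length := by
  unfold bigZ
  rw [List.mem_flatten]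
  constructor
  · rintro ⟨l, hl, hx⟩
    rw [List.mem_filter] at hl
    obtain ⟨hlv, hbig⟩ := hl
    rw [groupsD_values, List.mem_map] at hlv
    obtain ⟨k, hk, rfl⟩ := hlv
    rw [mem_grpL] at hx
    obtain ⟨hxr, hfx⟩ := hx
    subst hfx
    exact ⟨hxr, by simpa using hbig⟩
  · rintro ⟨hxr, hbig⟩
    refine ⟨grpL t (findU (parFc t) x), ?_, (mem_grpL t _ x).2 ⟨hxr, rfl⟩⟩
    rw [List.mem_filter]
    constructor
    · rw [groupsD_values, List.mem_map]
      exact ⟨findU (parFc t) x, (groupsD_keys_mem t _).2 ⟨x, hxr, rfl⟩, rfl⟩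
    · simpa using hbig

-- the conditional per-group fold is the fold over the big groups' concatenation
theorem foldl_values_flatten (z : List (List Int) → Int → List (List Int)) :
    ∀ (vals : List (List Int)) (g : List (List Int)),
    vals.foldl (fun g grp => if 3 ≤ grp.length then grp.foldl z g else g) g =
      ((vals.filter (fun grp => 3 ≤ grp.length)).flatten).foldl z g := by
  intro vals
  induction vals with
  | nil => intro g; rfl
  | cons v vals ih =>
      intro g
      rw [List.foldl_cons, List.filter_cons]
      by_cases h : 3 ≤ v.length
      · rw [if_pos h, if_pos (by simpa using h)]
        rw [List.flatten_cons, List.foldl_append, ih]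
      · rw [if_neg h, if_neg (by simpa using h)]
        exact ih g

-- B's port, rewritten via parFc / groupsD / bigZ
theorem alt_eq (t : List (List Int)) :
    get_tiles_be_removed_alt t =
      ((bigZ t).map cellOf).foldl (fun g q => set2 g q.1 q.2 0) t := by
  have hpar : ((PySem.List.pyRange 0 5 1).foldl (fun par r =>
      (PySem.List.pyRange 0 5 1).foldl (fun par c => unionCell t par r c) par)
    (PySem.List.pyRange 0 25 1)) = parFc t := by
    rw [parFc, cellsB, List.foldl_flatMap]
    simp only [List.foldl_map]
    rfl
  show ((PySem.List.pyRange 0 25 1).foldl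
      (fun d i => d.modify (findU ((PySem.List.pyRange 0 5 1).foldl (fun par r =>
        (PySem.List.pyRange 0 5 1).foldl (fun par c => unionCell t par r c) par)
        (PySem.List.pyRange 0 25 1)) i) [] (· ++ [i]))
      (PySem.Dict.empty : PySem.Dict Int (List Int))).values.foldl
    (fun g grp => if 3 ≤ grp.length then
      grp.foldl (fun g i => set2 g (PySem.Int.floordiv i 5) (PySem.Int.mod i 5) 0) g
    else g) t = _
  rw [hpar]
  rw [show ((PySem.List.pyRange 0 25 1).foldl
      (fun d i => d.modify (findU (parFc t) i) [] (· ++ [i]))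
      (PySem.Dict.empty : PySem.Dict Int (List Int))) = groupsD t from rfl]
  rw [foldl_values_flatten]
  rw [show ((groupsD t).values.filter (fun grp => 3 ≤ grp.length)).flatten = bigZ t from rfl]
  rw [List.foldl_map]
  rfl

theorem alt_length (t : List (List Int)) :
    (get_tiles_be_removed_alt t).length = t.length := by
  rw [alt_eq]
  exact length_zeroFold _ t

theorem alt_entry (t : List (List Int)) (i j : Nat) :
    entry? (get_tiles_be_removed_alt t) i j =
      if ((i : Int), (j : Int)) ∈ cellsB ∧ 3 ≤ (KF t ((i : Int), (j : Int))).card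
      then map0 (entry? t i j) else entry? t i j := by
  rw [alt_eq]
  rw [entry?_zeroFold _ t i j (by
    intro q hq
    rw [List.mem_map] at hq
    obtain ⟨x, hx, rfl⟩ := hq
    exact inb_cellOf x ((mem_bigZ t x).1 hx).1)]
  congr 1
  rw [eq_iff_iff]
  constructor
  · intro hmem
    rw [List.mem_map] at hmem
    obtain ⟨x, hx, hcell⟩ := hmem
    obtain ⟨hxr, hbig⟩ := (mem_bigZ t x).1 hx
    rw [grpL_card t x hxr, hcell] at hbig
    refine ⟨(mem_cellsB _).2 (hcell ▸ inb_cellOf x hxr), hbig⟩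
  · rintro ⟨hcells, hcard⟩
    have hinb := (mem_cellsB _).1 hcells
    obtain ⟨h1, h2, h3, h4⟩ := hinb
    set x : Int := (i : Int) * 5 + (j : Int) with hx
    have hxr : InRg x := by unfold InRg; omega
    have hcell : cellOf x = ((i : Int), (j : Int)) :=
      cellOf_idx (i : Int) (j : Int) ⟨h1, h2⟩ ⟨h3, h4⟩
    rw [List.mem_map]
    refine ⟨x, ?_, hcell⟩
    rw [mem_bigZ]
    exact ⟨hxr, by rw [grpL_card t x hxr, hcell]; exact hcard⟩

-- ===== VERDICT (by name: the statement is the Claim_ definition above) =====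
theorem get_tiles_be_removed_spec : Claim_equal_get_tiles_be_removed := by
  intro t _ _
  show get_tiles_be_removed t = get_tiles_be_removed_alt t
  obtain ⟨hlenA, hentA⟩ := A_char t
  apply grid_ext
  · rw [hlenA, alt_length]
  · intro i j
    rw [hentA i j, alt_entry t i j]
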